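-- pv_equiv track=rewrite | github.com/HaneulJung/Programmers | Programmers/Lv. 2/무인도 여행.py | solution
-- ===== SOURCE A (Python) =====
-- from collections import deque
--
-- def solution(maps):
--     answer = []
--
--     go_row = [0, 0, 1, -1]
--     go_column = [1, -1, 0, 0]
--
--     row_len = len(maps)
--     col_len = len(maps[0])
--
--     visited = [[False for _ in range(col_len)] for _ in range(row_len)]
--
--     q = deque()
--
--     for r in range(row_len):
--         for c in range(col_len):
--             if visited[r][c]:
--                 continue
--
--             if maps[r][c] != "X":
--                 q.append([r, c])
--                 s = int(maps[r][c])
--                 visited[r][c] = True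
--
--                 while q:
--                     cur = q.popleft()
--
--                     for k in range(4):
--                         nr = cur[0] + go_row[k]
--                         nc = cur[1] + go_column[k]
--                         if nc >= 0 and nc < col_len and nr >= 0 and nr < row_len and not visited[nr][nc]:
--                             visited[nr][nc] = True
--                             if maps[nr][nc] != "X":
--                                 q.append([nr, nc])
--                                 s += int(maps[nr][nc])
--                 answer.append(s)
--
--     if len(answer) == 0:
--         return [-1]
--
--     return sorted(answer)
-- ===== SOURCE B (Python) =====
-- def solution(maps):
--     # Union-find over (row, col) cells instead of per-component BFS.
--     R = len(maps)
--     C = len(maps[0])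
--     parent = {}
--     for r in range(R):
--         for c in range(C):
--             if maps[r][c] != "X":
--                 parent[(r, c)] = (r, c)
--
--     def find(p):
--         while parent[p] != p:
--             p = parent[p]
--         return p
--
--     def union(p, q):
--         rp, rq = find(p), find(q)
--         if rp != rq:
--             if rq < rp:
--                 rp, rq = rq, rp
--             parent[rq] = rp
--
--     for r in range(R):
--         for c in range(C):
--             if maps[r][c] != "X":
--                 if c + 1 < C and maps[r][c + 1] != "X":
--                     union((r, c), (r, c + 1))
--                 if r + 1 < R and maps[r + 1][c] != "X":
--                     union((r, c), (r + 1, c))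
--
--     sums = {}
--     for r in range(R):
--         for c in range(C):
--             if maps[r][c] != "X":
--                 root = find((r, c))
--                 sums[root] = sums.get(root, 0) + int(maps[r][c])
--
--     vals = list(sums.values())
--     if len(vals) == 0:
--         return [-1]
--     return sorted(vals)
-- ===== Notes on version B (the rewrite author's own statement) =====
-- stated objective: alternative
-- what changed: B replaces A's per-component BFS (deque + visited matrix, one flood fill per island) with a two-pass union-find over (row,col) cells: pass 1 unions each non-'X' cell with its right/down non-'X' neighbours, pass 2 accumulates each cell's digit into a dict keyed by its root; [-1]/sorted handling is unchanged.
import Mathlib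
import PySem

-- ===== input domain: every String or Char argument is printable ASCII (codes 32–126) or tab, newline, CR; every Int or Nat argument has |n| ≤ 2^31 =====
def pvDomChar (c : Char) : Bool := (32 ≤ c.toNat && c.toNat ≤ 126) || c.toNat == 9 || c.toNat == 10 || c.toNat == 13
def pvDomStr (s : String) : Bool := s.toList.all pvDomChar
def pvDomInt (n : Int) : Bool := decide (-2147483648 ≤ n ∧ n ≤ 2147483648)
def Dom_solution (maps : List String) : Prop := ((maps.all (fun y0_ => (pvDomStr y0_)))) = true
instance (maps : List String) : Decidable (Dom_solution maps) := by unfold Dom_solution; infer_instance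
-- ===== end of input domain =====

-- B replaces A's per-component BFS (queue + visited matrix) by a two-pass union-find over (row, col)
-- cells; objective: alternative algorithm, same results.

-- shared accessor helpers (both Pythons read maps[r][c] the same way; out-of-range reads, excluded by
-- Pre_, default to 'X' here)
def pvCell (maps : List String) (r c : Nat) : Char := ((maps.getD r "").toList.getD c 'X')
-- int(maps[r][c]) for a digit character (Pre_ restricts non-'X' cells to digits, where this is exact)
def pvVal (ch : Char) : Int := (ch.toNat : Int) - 48
-- row-major scan list, shared loop index set 'for r in range(R): for c in range(C)'
def pvCells (R C : Nat) : List (Nat × Nat) := (List.range R).flatMap (fun r => (List.range C).map (fun c => (r, c)))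

-- ===== PORT A =====
structure PvSt where
  vis : List (List Bool)
  q : List (Int × Int)
  s : Int
deriving Repr

def pvVis (v : List (List Bool)) (r c : Nat) : Bool := (v.getD r []).getD c false
def pvMark (v : List (List Bool)) (r c : Nat) : List (List Bool) := v.set r ((v.getD r []).set c true)

def pvGoRow : List Int := [0, 0, 1, -1]
def pvGoCol : List Int := [1, -1, 0, 0]

-- one direction k of the 'for k in range(4)' neighbour loop
def pvBfsStep (maps : List String) (rowLen colLen : Nat) (cur : Int × Int) (st : PvSt) (k : Nat) : PvSt :=
  let nr := cur.1 + pvGoRow.getD k 0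
  let nc := cur.2 + pvGoCol.getD k 0
  if 0 ≤ nc ∧ nc < (colLen : Int) ∧ 0 ≤ nr ∧ nr < (rowLen : Int) ∧ pvVis st.vis nr.toNat nc.toNat = false then
    if pvCell maps nr.toNat nc.toNat ≠ 'X' then
      { vis := pvMark st.vis nr.toNat nc.toNat, q := st.q ++ [(nr, nc)],
        s := st.s + pvVal (pvCell maps nr.toNat nc.toNat) }
    else
      { vis := pvMark st.vis nr.toNat nc.toNat, q := st.q, s := st.s }
  else st

-- the 'while q:' loop; fuel is a totality guard only: rowLen*colLen+1 always suffices (each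
-- iteration pops one element and enqueues only freshly visited cells — proved below)
def pvBfsLoop (maps : List String) (rowLen colLen : Nat) : Nat → PvSt → PvSt
  | 0, st => st
  | fuel + 1, st =>
    match st.q with
    | [] => st
    | cur :: rest =>
      pvBfsLoop maps rowLen colLen fuel
        ((List.range 4).foldl (fun s k => pvBfsStep maps rowLen colLen cur s k) { st with q := rest })

-- body of the outer 'for r: for c:' scan
def pvCellStep (maps : List String) (rowLen colLen : Nat) (ac : List (List Bool) × List Int)
    (rc : Nat × Nat) : List (List Bool) × List Int :=
  if pvVis ac.1 rc.1 rc.2 then ac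
  else if pvCell maps rc.1 rc.2 ≠ 'X' then
    let st := pvBfsLoop maps rowLen colLen (rowLen * colLen + 1)
      { vis := pvMark ac.1 rc.1 rc.2, q := [((rc.1 : Int), (rc.2 : Int))], s := pvVal (pvCell maps rc.1 rc.2) }
    (st.vis, ac.2 ++ [st.s])
  else ac

def solution (maps : List String) : List Int :=
  let rowLen := maps.length
  let colLen := (maps.getD 0 "").length
  let visited0 := List.replicate rowLen (List.replicate colLen false)
  let res := (pvCells rowLen colLen).foldl (pvCellStep maps rowLen colLen) (visited0, [])
  if res.2.length = 0 then [-1] else PySem.List.sorted res.2 (fun x => x) false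

-- ===== PORT B =====
-- Python tuple comparison (r, c) < (r', c')
def pvLexLt (p q : Nat × Nat) : Bool := decide (p.1 < q.1) || (p.1 == q.1 && decide (p.2 < q.2))

-- parent = {(r,c): (r,c) for non-'X' cells}
def pvParent0 (maps : List String) (R C : Nat) : PySem.Dict (Nat × Nat) (Nat × Nat) :=
  (pvCells R C).foldl (fun d p => if pvCell maps p.1 p.2 ≠ 'X' then d.insert p p else d) PySem.Dict.empty

-- 'while parent[p] != p: p = parent[p]'; find is only called on keys of parent, so the getD default
-- is never read; fuel is a totality guard only (parent chains strictly decrease lexicographically,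
-- so R*C+1 steps always suffice — proved below)
def pvFind (parent : PySem.Dict (Nat × Nat) (Nat × Nat)) : Nat → (Nat × Nat) → (Nat × Nat)
  | 0, p => p
  | fuel + 1, p =>
    let pp := parent.getD p p
    if pp = p then p else pvFind parent fuel pp

def pvUnion (parent : PySem.Dict (Nat × Nat) (Nat × Nat)) (fuel : Nat) (p q : Nat × Nat) :
    PySem.Dict (Nat × Nat) (Nat × Nat) :=
  let rp := pvFind parent fuel p
  let rq := pvFind parent fuel q
  if rp = rq then parent
  else if pvLexLt rq rp then parent.insert rp rq else parent.insert rq rp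

-- first pass: union each non-'X' cell with its right and down non-'X' neighbours
def pvPass1 (maps : List String) (R C : Nat) (parent : PySem.Dict (Nat × Nat) (Nat × Nat)) :
    PySem.Dict (Nat × Nat) (Nat × Nat) :=
  (pvCells R C).foldl (fun d p =>
    if pvCell maps p.1 p.2 ≠ 'X' then
      let d1 := if p.2 + 1 < C ∧ pvCell maps p.1 (p.2 + 1) ≠ 'X' then pvUnion d (R * C + 1) p (p.1, p.2 + 1) else d
      if p.1 + 1 < R ∧ pvCell maps (p.1 + 1) p.2 ≠ 'X' then pvUnion d1 (R * C + 1) p (p.1 + 1, p.2) else d1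
    else d) parent

-- second pass: sums[find(p)] += int(maps[r][c])
def pvPass2 (maps : List String) (R C : Nat) (parent : PySem.Dict (Nat × Nat) (Nat × Nat)) :
    PySem.Dict (Nat × Nat) Int :=
  (pvCells R C).foldl (fun d p =>
    if pvCell maps p.1 p.2 ≠ 'X' then
      let root := pvFind parent (R * C + 1) p
      d.insert root (d.getD root 0 + pvVal (pvCell maps p.1 p.2))
    else d) PySem.Dict.empty

def solution_alt (maps : List String) : List Int :=
  let R := maps.length
  let C := (maps.getD 0 "").length
  let parent := pvPass1 maps R C (pvParent0 maps R C)
  let sums := pvPass2 maps R C parent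
  let vals := sums.values
  if vals.length = 0 then [-1] else PySem.List.sorted vals (fun x => x) false

-- ===== PRECONDITION & SPEC =====
-- Pre_ excludes exactly the inputs where Python A raises: empty maps (IndexError on maps[0]), a row
-- shorter than the first row (IndexError), and a non-'X' non-digit character in the scanned
-- rectangle (ValueError from int()).
def Pre_solution (maps : List String) : Prop :=
  maps ≠ [] ∧ ∀ r < maps.length, (maps.getD 0 "").length ≤ (maps.getD r "").length ∧
    ∀ c < (maps.getD 0 "").length, pvCell maps r c = 'X' ∨ ('0' ≤ pvCell maps r c ∧ pvCell maps r c ≤ '9')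
instance (maps : List String) : Decidable (Pre_solution maps) := by unfold Pre_solution; infer_instance
def pvWitness_solution : List String := ["X591X", "X1X5X", "X231X", "1XXX1"]

def Spec_solution (maps : List String) (out : List Int) : Prop := out = solution_alt maps
instance (maps : List String) (out : List Int) : Decidable (Spec_solution maps out) := by unfold Spec_solution; infer_instance

-- ===== CLAIM (what is proved, stated in full; the proofs are below) =====
def Claim_equal_solution : Prop := ∀ (maps : List String), Dom_solution maps → Pre_solution maps → Spec_solution maps (solution maps)

-- ===== LEMMAS AND PROOFS =====


-- ---------- abbreviations ----------
abbrev pvOk (maps : List String) (p : Nat × Nat) : Prop :=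
  p.1 < maps.length ∧ p.2 < (maps.getD 0 "").length ∧ pvCell maps p.1 p.2 ≠ 'X'

def pvOkb (maps : List String) (p : Nat × Nat) : Bool := decide (pvOk maps p)

def pvValAt (maps : List String) (p : Nat × Nat) : Int := pvVal (pvCell maps p.1 p.2)

-- the list of (cell, right/down neighbour) pairs that pass-1 of B unions, in processing order
def pvEdgeList (maps : List String) : List ((Nat × Nat) × (Nat × Nat)) :=
  (pvCells maps.length (maps.getD 0 "").length).flatMap (fun p =>
    (if pvCell maps p.1 p.2 ≠ 'X' ∧ p.2 + 1 < (maps.getD 0 "").length ∧ pvCell maps p.1 (p.2 + 1) ≠ 'X'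
      then [(p, (p.1, p.2 + 1))] else []) ++
    (if pvCell maps p.1 p.2 ≠ 'X' ∧ p.1 + 1 < maps.length ∧ pvCell maps (p.1 + 1) p.2 ≠ 'X'
      then [(p, (p.1 + 1, p.2))] else []))

def pvE (maps : List String) (p q : Nat × Nat) : Prop := (p, q) ∈ pvEdgeList maps
def pvConn (maps : List String) (p q : Nat × Nat) : Prop := Relation.EqvGen (pvE maps) p q
def pvAdj (maps : List String) (p q : Nat × Nat) : Prop := pvE maps p q ∨ pvE maps q p

noncomputable def pvIsRepB (maps : List String) (p : Nat × Nat) : Bool :=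
  pvOkb maps p && @decide (∀ q, pvLexLt q p = true → ¬(pvOk maps q ∧ pvConn maps q p)) (Classical.propDecidable _)

noncomputable def pvRepList (maps : List String) : List (Nat × Nat) :=
  (pvCells maps.length (maps.getD 0 "").length).filter (pvIsRepB maps)

noncomputable def pvClassMembers (maps : List String) (rep : Nat × Nat) : List (Nat × Nat) :=
  (pvCells maps.length (maps.getD 0 "").length).filter
    (fun p => pvOkb maps p && @decide (pvConn maps rep p) (Classical.propDecidable _))

noncomputable def pvClassSum (maps : List String) (rep : Nat × Nat) : Int :=
  ((pvClassMembers maps rep).map (pvValAt maps)).sum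

noncomputable def pvSums (maps : List String) : List Int := (pvRepList maps).map (pvClassSum maps)

-- ---------- generic list lemmas ----------
theorem pv_filter_flip_sum {α : Type} [DecidableEq α] (g : α → Int) :
    ∀ (l : List α), l.Nodup → ∀ (f f' : α → Bool) (x : α), x ∈ l → f x = false → f' x = true →
    (∀ y, y ≠ x → f' y = f y) → ((l.filter f').map g).sum = ((l.filter f).map g).sum + g x := by
  intro l
  induction l with
  | nil => intro _ f f' x hx; simp at hx
  | cons a t ih =>
    intro hnd f f' x hx hfx hf'x hagree
    rcases List.mem_cons.1 hx with rfl | hxt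
    · have hxnot : x ∉ t := (List.nodup_cons.1 hnd).1
      have ht : t.filter f' = t.filter f :=
        List.filter_congr (fun y hy => hagree y (fun h => hxnot (h ▸ hy)))
      simp [List.filter_cons, hfx, hf'x, ht]
      ring
    · have hax : a ≠ x := fun h => (List.nodup_cons.1 hnd).1 (h ▸ hxt)
      have hfa : f' a = f a := hagree a hax
      have hrec := ih (List.nodup_cons.1 hnd).2 f f' x hxt hfx hf'x hagree
      by_cases hfa2 : f a = true
      · simp [List.filter_cons, hfa, hfa2, hrec]; ring
      · simp only [Bool.not_eq_true] at hfa2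
        simp [List.filter_cons, hfa, hfa2, hrec]

theorem pv_filter_flip_length {α : Type} [DecidableEq α] :
    ∀ (l : List α), l.Nodup → ∀ (f f' : α → Bool) (x : α), x ∈ l → f x = true → f' x = false →
    (∀ y, y ≠ x → f' y = f y) → (l.filter f).length = (l.filter f').length + 1 := by
  intro l
  induction l with
  | nil => intro _ f f' x hx; simp at hx
  | cons a t ih =>
    intro hnd f f' x hx hfx hf'x hagree
    rcases List.mem_cons.1 hx with rfl | hxt
    · have hxnot : x ∉ t := (List.nodup_cons.1 hnd).1
      have ht : t.filter f' = t.filter f :=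
        List.filter_congr (fun y hy => hagree y (fun h => hxnot (h ▸ hy)))
      simp [List.filter_cons, hfx, hf'x, ht]
    · have hax : a ≠ x := fun h => (List.nodup_cons.1 hnd).1 (h ▸ hxt)
      have hfa : f' a = f a := hagree a hax
      have hrec := ih (List.nodup_cons.1 hnd).2 f f' x hxt hfx hf'x hagree
      by_cases hfa2 : f a = true
      · simp [List.filter_cons, hfa, hfa2, hrec]
      · simp only [Bool.not_eq_true] at hfa2
        simp [List.filter_cons, hfa, hfa2, hrec]

-- ---------- lexicographic order ----------
theorem pvLexLt_irrefl (p : Nat × Nat) : pvLexLt p p = false := by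
  simp [pvLexLt]

theorem pvLexLt_trichotomy (p q : Nat × Nat) : pvLexLt p q = true ∨ p = q ∨ pvLexLt q p = true := by
  rcases p with ⟨a, b⟩; rcases q with ⟨c, d⟩
  simp [pvLexLt, Prod.ext_iff]; omega

theorem pvLexLt_asymm {p q : Nat × Nat} (h : pvLexLt p q = true) : pvLexLt q p = false := by
  rcases p with ⟨a, b⟩; rcases q with ⟨c, d⟩
  simp [pvLexLt] at *; omega

def pvRank (C : Nat) (p : Nat × Nat) : Nat := p.1 * C + p.2

theorem pvLexLt_rank {C : Nat} {p q : Nat × Nat} (hp : p.2 < C) (hq : q.2 < C) :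
    pvLexLt p q = true ↔ pvRank C p < pvRank C q := by
  rcases p with ⟨a, b⟩; rcases q with ⟨c, d⟩
  simp [pvLexLt, pvRank] at *
  constructor
  · rintro (h | ⟨rfl, h⟩) <;> nlinarith
  · intro h; by_contra hc
    rcases (by omega : (c < a ∨ (c = a ∧ d ≤ b)) ∨ (a < c ∨ (a = c ∧ b < d))) with h2 | h2
    · rcases h2 with h2 | ⟨rfl, h2⟩ <;> nlinarith
    · exact hc h2

theorem pvRank_lt {maps : List String} {p : Nat × Nat} (h : pvOk maps p) :
    pvRank (maps.getD 0 "").length p < maps.length * (maps.getD 0 "").length := by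
  obtain ⟨h1, h2, _⟩ := h; unfold pvRank; nlinarith

-- ---------- pvCells ----------
theorem mem_pvCells {R C : Nat} {p : Nat × Nat} : p ∈ pvCells R C ↔ p.1 < R ∧ p.2 < C := by
  rcases p with ⟨a, b⟩
  simp only [pvCells, List.mem_flatMap, List.mem_map, List.mem_range]
  constructor
  · rintro ⟨r, hr, c, hc, h⟩
    obtain ⟨rfl, rfl⟩ := Prod.mk.injEq .. ▸ h
    cases h; exact ⟨hr, hc⟩
  · rintro ⟨ha, hb⟩; exact ⟨a, ha, b, hb, rfl⟩

theorem pvCells_succ {R C : Nat} :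
    pvCells (R + 1) C = pvCells R C ++ (List.range C).map (fun c => (R, c)) := by
  simp [pvCells, List.range_succ]

theorem length_pvCells {R C : Nat} : (pvCells R C).length = R * C := by
  induction R with
  | zero => simp [pvCells]
  | succ n ih => rw [pvCells_succ]; simp [ih]; ring

theorem pairwise_pvCells {R C : Nat} : (pvCells R C).Pairwise (fun p q => pvLexLt p q = true) := by
  induction R with
  | zero => simp [pvCells]
  | succ n ih =>
    rw [pvCells_succ]
    rw [List.pairwise_append]
    refine ⟨ih, ?_, ?_⟩
    · rw [List.pairwise_map]
      refine List.Pairwise.imp ?_ (List.pairwise_lt_range)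
      intro a b h; simp [pvLexLt, h]
    · intro p hp q hq
      obtain ⟨h1, _⟩ := mem_pvCells.1 hp
      simp only [List.mem_map, List.mem_range] at hq
      obtain ⟨c, _, rfl⟩ := hq
      simp [pvLexLt]; omega

theorem nodup_pvCells {R C : Nat} : (pvCells R C).Nodup :=
  (pairwise_pvCells).imp (fun h => by
    rintro rfl; simp [pvLexLt_irrefl] at h)

-- ---------- visited matrix ----------
def pvShape (v : List (List Bool)) (R C : Nat) : Prop := v.length = R ∧ ∀ row ∈ v, row.length = C

theorem pvShape_replicate {R C : Nat} : pvShape (List.replicate R (List.replicate C false)) R C := by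
  constructor
  · simp
  · intro row hrow; simp at hrow; simp [hrow]

theorem pv_getD_set_self {α : Type} (v : List α) (r : Nat) (x d : α) (h : r < v.length) :
    (v.set r x).getD r d = x := by
  rw [List.getD_eq_getElem?_getD, List.getElem?_set_self h, Option.getD_some]

theorem pv_getD_set_ne {α : Type} (v : List α) {r r' : Nat} (x d : α) (h : r' ≠ r) :
    (v.set r x).getD r' d = v.getD r' d := by
  rw [List.getD_eq_getElem?_getD, List.getElem?_set_ne (fun h2 => h h2.symm),
    ← List.getD_eq_getElem?_getD]

theorem pvVis_replicate {R C r c : Nat} : pvVis (List.replicate R (List.replicate C false)) r c = false := by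
  simp only [pvVis, List.getD_eq_getElem?_getD, List.getElem?_replicate]
  split <;> simp

theorem pvShape_mark {v : List (List Bool)} {R C r c : Nat} (h : pvShape v R C) :
    pvShape (pvMark v r c) R C := by
  obtain ⟨h1, h2⟩ := h
  refine ⟨by simp [pvMark, h1], ?_⟩
  intro row hrow
  unfold pvMark at hrow
  rcases Nat.lt_or_ge r v.length with hr | hr
  · rcases List.mem_or_eq_of_mem_set hrow with h3 | h3
    · exact h2 row h3
    · subst h3
      rw [List.length_set]
      rw [List.getD_eq_getElem?_getD, List.getElem?_eq_getElem hr]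
      exact h2 _ (List.getElem_mem hr)
  · rw [List.set_eq_of_length_le hr] at hrow
    exact h2 row hrow

theorem pvVis_mark {v : List (List Bool)} {R C : Nat} (h : pvShape v R C) {r c : Nat}
    (hr : r < R) (hc : c < C) (r' c' : Nat) :
    pvVis (pvMark v r c) r' c' = if r' = r ∧ c' = c then true else pvVis v r' c' := by
  obtain ⟨h1, h2⟩ := h
  have hrv : r < v.length := h1 ▸ hr
  have hrow : (v.getD r []).length = C := by
    rw [List.getD_eq_getElem?_getD, List.getElem?_eq_getElem hrv]
    exact h2 _ (List.getElem_mem hrv)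
  unfold pvVis pvMark
  by_cases hre : r' = r
  · rw [hre, pv_getD_set_self _ _ _ _ hrv]
    by_cases hce : c' = c
    · rw [hce, pv_getD_set_self _ _ _ _ (by omega)]
      simp [hre, hce]
    · rw [pv_getD_set_ne _ _ _ hce]
      simp [hre, hce]
  · rw [pv_getD_set_ne _ _ _ hre]
    simp [hre]

-- ---------- EqvGen generic ----------
theorem pv_eqvGen_false {α : Type} {p q : α} : Relation.EqvGen (fun _ _ => False) p q ↔ p = q := by
  constructor
  · intro h; induction h with
    | rel _ _ h => exact h.elim
    | refl => rfl
    | symm _ _ _ ih => exact ih.symm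
    | trans _ _ _ _ _ ih1 ih2 => exact ih1.trans ih2
  · rintro rfl; exact Relation.EqvGen.refl _

theorem pv_eqvGen_congr {α : Type} {E F : α → α → Prop} (h : ∀ x y, E x y ↔ F x y) {p q : α} :
    Relation.EqvGen E p q ↔ Relation.EqvGen F p q :=
  ⟨Relation.EqvGen.mono (fun a b hab => (h a b).1 hab),
   Relation.EqvGen.mono (fun a b hab => (h a b).2 hab)⟩

theorem pv_eqvGen_join {α : Type} {E : α → α → Prop} {a b p q : α} :
    Relation.EqvGen (fun x y => E x y ∨ (x = a ∧ y = b)) p q ↔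
      Relation.EqvGen E p q ∨ (Relation.EqvGen E p a ∧ Relation.EqvGen E b q) ∨
        (Relation.EqvGen E p b ∧ Relation.EqvGen E a q) := by
  constructor
  · intro h
    induction h with
    | rel x y hxy =>
      rcases hxy with h | ⟨rfl, rfl⟩
      · exact Or.inl (.rel _ _ h)
      · exact Or.inr (Or.inl ⟨.refl _, .refl _⟩)
    | refl x => exact Or.inl (.refl _)
    | symm x y _ ih =>
      rcases ih with h | ⟨h1, h2⟩ | ⟨h1, h2⟩
      · exact Or.inl (h.symm _ _)
      · exact Or.inr (Or.inr ⟨h2.symm _ _, h1.symm _ _⟩)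
      · exact Or.inr (Or.inl ⟨h2.symm _ _, h1.symm _ _⟩)
    | trans x y z _ _ ih1 ih2 =>
      rcases ih1 with h1 | ⟨h1a, h1b⟩ | ⟨h1a, h1b⟩ <;>
        rcases ih2 with h2 | ⟨h2a, h2b⟩ | ⟨h2a, h2b⟩
      · exact Or.inl (h1.trans _ _ _ h2)
      · exact Or.inr (Or.inl ⟨h1.trans _ _ _ h2a, h2b⟩)
      · exact Or.inr (Or.inr ⟨h1.trans _ _ _ h2a, h2b⟩)
      · exact Or.inr (Or.inl ⟨h1a, h1b.trans _ _ _ h2⟩)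
      · exact Or.inr (Or.inl ⟨h1a, h2b⟩)
      · exact Or.inl (h1a.trans _ _ _ h2b)
      · exact Or.inr (Or.inr ⟨h1a, h1b.trans _ _ _ h2⟩)
      · exact Or.inl (h1a.trans _ _ _ h2b)
      · exact Or.inr (Or.inr ⟨h1a, h2b⟩)
  · have hmono : ∀ {x y : α}, Relation.EqvGen E x y →
        Relation.EqvGen (fun x y => E x y ∨ (x = a ∧ y = b)) x y :=
      fun h => h.mono (fun _ _ h' => Or.inl h')
    have hab : Relation.EqvGen (fun x y => E x y ∨ (x = a ∧ y = b)) a b :=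
      .rel _ _ (Or.inr ⟨rfl, rfl⟩)
    rintro (h | ⟨h1, h2⟩ | ⟨h1, h2⟩)
    · exact hmono h
    · exact ((hmono h1).trans _ _ _ hab).trans _ _ _ (hmono h2)
    · exact ((hmono h1).trans _ _ _ (hab.symm _ _)).trans _ _ _ (hmono h2)

-- ---------- edges / adjacency / connectivity ----------
theorem pvE_iff {maps : List String} {p q : Nat × Nat} :
    pvE maps p q ↔ pvOk maps p ∧ pvOk maps q ∧ (q = (p.1, p.2 + 1) ∨ q = (p.1 + 1, p.2)) := by
  unfold pvE pvEdgeList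
  rw [List.mem_flatMap]
  constructor
  · rintro ⟨x, hx, hmem⟩
    obtain ⟨hx1, hx2⟩ := mem_pvCells.1 hx
    rw [List.mem_append] at hmem
    rcases hmem with hmem | hmem
    · split at hmem
      · rename_i hcond
        simp only [List.mem_singleton, Prod.mk.injEq] at hmem
        obtain ⟨rfl, rfl⟩ := hmem
        exact ⟨⟨hx1, hx2, hcond.1⟩, ⟨hx1, hcond.2.1, hcond.2.2⟩, Or.inl rfl⟩
      · simp at hmem
    · split at hmem
      · rename_i hcond
        simp only [List.mem_singleton, Prod.mk.injEq] at hmem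
        obtain ⟨rfl, rfl⟩ := hmem
        exact ⟨⟨hx1, hx2, hcond.1⟩, ⟨hcond.2.1, hx2, hcond.2.2⟩, Or.inr rfl⟩
      · simp at hmem
  · rintro ⟨hp, hq, rfl | rfl⟩
    · refine ⟨p, mem_pvCells.2 ⟨hp.1, hp.2.1⟩, ?_⟩
      rw [List.mem_append]
      left
      rw [if_pos ⟨hp.2.2, hq.2.1, hq.2.2⟩]
      exact List.mem_singleton.2 rfl
    · refine ⟨p, mem_pvCells.2 ⟨hp.1, hp.2.1⟩, ?_⟩
      rw [List.mem_append]
      right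
      rw [if_pos ⟨hp.2.2, hq.1, hq.2.2⟩]
      exact List.mem_singleton.2 rfl

theorem pvAdj_ok {maps : List String} {p q : Nat × Nat} (h : pvAdj maps p q) :
    pvOk maps p ∧ pvOk maps q := by
  rcases h with h | h <;> rw [pvE_iff] at h <;> tauto

theorem pvConn_ok {maps : List String} {p q : Nat × Nat} (h : pvConn maps p q) :
    p = q ∨ (pvOk maps p ∧ pvOk maps q) := by
  induction h with
  | rel _ _ h => rw [pvE_iff] at h; exact Or.inr ⟨h.1, h.2.1⟩
  | refl => exact Or.inl rfl
  | symm _ _ _ ih => tauto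
  | trans x y z _ _ ih1 ih2 => rcases ih1 with rfl | h1 <;> rcases ih2 with rfl | h2 <;> tauto

theorem pvAdj_conn {maps : List String} {p q : Nat × Nat} (h : pvAdj maps p q) : pvConn maps p q := by
  rcases h with h | h
  · exact Relation.EqvGen.rel _ _ h
  · exact (Relation.EqvGen.rel _ _ h).symm _ _

-- membership in an adjacency-closed set is constant on connected components
theorem pv_conn_mem_iff {maps : List String} {M : Nat × Nat → Prop}
    (hcl : ∀ a b, M a → pvAdj maps a b → M b) {p q : Nat × Nat} (h : pvConn maps p q) :
    M p ↔ M q := by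
  induction h with
  | rel x y h => exact ⟨fun hx => hcl x y hx (Or.inl h), fun hy => hcl y x hy (Or.inr h)⟩
  | refl => exact Iff.rfl
  | symm _ _ _ ih => exact ih.symm
  | trans _ _ _ _ _ ih1 ih2 => exact ih1.trans ih2

-- the four BFS directions give adjacency
theorem pvAdj_of_nbr {maps : List String} {p q : Nat × Nat} (hp : pvOk maps p) (hq : pvOk maps q)
    (h : q = (p.1, p.2 + 1) ∨ q = (p.1 + 1, p.2) ∨ p = (q.1, q.2 + 1) ∨ p = (q.1 + 1, q.2)) :
    pvAdj maps p q := by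
  rcases h with h | h | h | h
  · exact Or.inl (pvE_iff.2 ⟨hp, hq, Or.inl h⟩)
  · exact Or.inl (pvE_iff.2 ⟨hp, hq, Or.inr h⟩)
  · exact Or.inr (pvE_iff.2 ⟨hq, hp, Or.inl h⟩)
  · exact Or.inr (pvE_iff.2 ⟨hq, hp, Or.inr h⟩)

theorem pvAdj_elim {maps : List String} {p q : Nat × Nat} (h : pvAdj maps p q) :
    q = (p.1, p.2 + 1) ∨ q = (p.1 + 1, p.2) ∨ p = (q.1, q.2 + 1) ∨ p = (q.1 + 1, q.2) := by
  rcases h with h | h <;> rw [pvE_iff] at h <;> tauto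

-- ---------- representatives ----------
def pvIsRep (maps : List String) (p : Nat × Nat) : Prop :=
  pvOk maps p ∧ ∀ q, pvLexLt q p = true → ¬(pvOk maps q ∧ pvConn maps q p)

theorem pvIsRepB_eq {maps : List String} {p : Nat × Nat} :
    pvIsRepB maps p = true ↔ pvIsRep maps p := by
  unfold pvIsRepB pvIsRep pvOkb
  rw [Bool.and_eq_true, decide_eq_true_eq, @decide_eq_true_eq _ (Classical.propDecidable _)]

theorem pv_rep_exists {maps : List String} :
    ∀ (n : Nat) (q : Nat × Nat), pvRank (maps.getD 0 "").length q ≤ n → pvOk maps q →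
      ∃ rep, pvIsRep maps rep ∧ pvConn maps rep q := by
  intro n
  induction n using Nat.strong_induction_on with
  | _ n ih =>
    intro q hrank hok
    by_cases h : pvIsRep maps q
    · exact ⟨q, h, .refl _⟩
    · unfold pvIsRep at h
      rw [not_and] at h
      have h2 := h hok
      push_neg at h2
      obtain ⟨r, hlt, hrok, hconn⟩ := h2
      have hrlt : pvRank (maps.getD 0 "").length r < pvRank (maps.getD 0 "").length q :=
        (pvLexLt_rank hrok.2.1 hok.2.1).1 hlt
      obtain ⟨rep, hrep, hconn2⟩ := ih (pvRank (maps.getD 0 "").length r) (by omega) r le_rfl hrok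
      exact ⟨rep, hrep, hconn2.trans _ _ _ hconn⟩

theorem pv_rep_unique {maps : List String} {r1 r2 : Nat × Nat} (h1 : pvIsRep maps r1)
    (h2 : pvIsRep maps r2) (h : pvConn maps r1 r2) : r1 = r2 := by
  rcases pvLexLt_trichotomy r1 r2 with hlt | heq | hlt
  · exact absurd ⟨h1.1, h⟩ (h2.2 r1 hlt)
  · exact heq
  · exact absurd ⟨h2.1, h.symm _ _⟩ (h1.2 r2 hlt)


-- ---------- BFS analysis (A side) ----------
def pvVisP (v : List (List Bool)) (p : Nat × Nat) : Bool := pvVis v p.1 p.2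

def pvNew (maps : List String) (v0 v : List (List Bool)) (p : Nat × Nat) : Prop :=
  pvOk maps p ∧ pvVisP v p = true ∧ pvVisP v0 p = false

def pvNewB (maps : List String) (v0 v : List (List Bool)) (p : Nat × Nat) : Bool :=
  pvOkb maps p && pvVisP v p && !pvVisP v0 p

theorem pvNewB_eq {maps : List String} {v0 v : List (List Bool)} {p : Nat × Nat} :
    pvNewB maps v0 v p = true ↔ pvNew maps v0 v p := by
  unfold pvNewB pvNew pvOkb
  simp [Bool.and_eq_true, decide_eq_true_eq, and_assoc]

def pvUnvisCount (maps : List String) (v : List (List Bool)) : Nat :=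
  ((pvCells maps.length (maps.getD 0 "").length).filter
    (fun p => pvOkb maps p && !pvVisP v p)).length

-- closure of the already-visited region (outer-loop invariant fact fed into the BFS lemma)
def pvV0Closed (maps : List String) (v0 : List (List Bool)) : Prop :=
  ∀ p q', pvOk maps p → pvVisP v0 p = true → pvAdj maps p q' → pvVisP v0 q' = true

theorem pv_disjoint {maps : List String} {v0 : List (List Bool)} {seed : Nat × Nat}
    (hcl : pvV0Closed maps v0) (hs0 : pvVisP v0 seed = false) {p : Nat × Nat}
    (hc : pvConn maps seed p) (hok : pvOk maps p) : pvVisP v0 p = false := by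
  have hiff := pv_conn_mem_iff (M := fun x => pvOk maps x ∧ pvVisP v0 x = true)
    (fun a b ha hab => ⟨(pvAdj_ok hab).2, hcl a b ha.1 ha.2 hab⟩) hc
  rcases Bool.eq_false_or_eq_true (pvVisP v0 p) with h | h
  · exact absurd (hiff.2 ⟨hok, h⟩).2 (by simp [hs0])
  · exact h

def pvCore (maps : List String) (v0 : List (List Bool)) (seed : Nat × Nat) (st : PvSt) : Prop :=
  pvShape st.vis maps.length (maps.getD 0 "").length ∧
  (∀ p : Nat × Nat, pvVisP v0 p = true → pvVisP st.vis p = true) ∧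
  (∀ x ∈ st.q, ∃ p : Nat × Nat, x = ((p.1 : Int), (p.2 : Int)) ∧ pvNew maps v0 st.vis p) ∧
  (∀ p, pvNew maps v0 st.vis p → pvConn maps seed p) ∧
  pvNew maps v0 st.vis seed ∧
  st.s = (((pvCells maps.length (maps.getD 0 "").length).filter (pvNewB maps v0 st.vis)).map
    (pvValAt maps)).sum

def pvInv (maps : List String) (v0 : List (List Bool)) (seed : Nat × Nat) (fuel : Nat)
    (st : PvSt) : Prop :=
  pvCore maps v0 seed st ∧
  (∀ p, pvNew maps v0 st.vis p → ((p.1 : Int), (p.2 : Int)) ∉ st.q →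
    ∀ q', pvAdj maps p q' → pvVisP st.vis q' = true) ∧
  st.q.length + pvUnvisCount maps st.vis ≤ fuel

def pvNbrI (cur : Int × Int) (k : Nat) : Int × Int :=
  (cur.1 + pvGoRow.getD k 0, cur.2 + pvGoCol.getD k 0)

theorem pvNbrI_zero (c : Int × Int) : pvNbrI c 0 = (c.1, c.2 + 1) := by
  simp [pvNbrI, pvGoRow, pvGoCol]

theorem pvNbrI_one (c : Int × Int) : pvNbrI c 1 = (c.1, c.2 - 1) := by
  simp [pvNbrI, pvGoRow, pvGoCol]; ring

theorem pvNbrI_two (c : Int × Int) : pvNbrI c 2 = (c.1 + 1, c.2) := by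
  simp [pvNbrI, pvGoRow, pvGoCol]

theorem pvNbrI_three (c : Int × Int) : pvNbrI c 3 = (c.1 - 1, c.2) := by
  simp [pvNbrI, pvGoRow, pvGoCol]; ring

def pvMidInv (maps : List String) (v0 : List (List Bool)) (seed cur : Nat × Nat) (fuel k : Nat)
    (st : PvSt) : Prop :=
  pvCore maps v0 seed st ∧
  (∀ p, pvNew maps v0 st.vis p → ((p.1 : Int), (p.2 : Int)) ∉ st.q → p ≠ cur →
    ∀ q', pvAdj maps p q' → pvVisP st.vis q' = true) ∧
  (∀ j < k, ∀ q' : Nat × Nat, pvOk maps q' →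
    ((q'.1 : Int), (q'.2 : Int)) = pvNbrI ((cur.1 : Int), (cur.2 : Int)) j →
    pvVisP st.vis q' = true) ∧
  st.q.length + pvUnvisCount maps st.vis ≤ fuel

theorem pv_cast_pair_inj {p q : Nat × Nat}
    (h : ((p.1 : Int), (p.2 : Int)) = ((q.1 : Int), (q.2 : Int))) : p = q := by
  have h1 := congrArg Prod.fst h
  have h2 := congrArg Prod.snd h
  simp only at h1 h2
  exact Prod.ext (by exact_mod_cast h1) (by exact_mod_cast h2)

theorem pv_adj_of_delta {maps : List String} {cur n : Nat × Nat} (hcur : pvOk maps cur)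
    (hn : pvOk maps n)
    (hd : ((n.1 : Int) - cur.1 = 0 ∧ (n.2 : Int) - cur.2 = 1) ∨
      ((n.1 : Int) - cur.1 = 0 ∧ (n.2 : Int) - cur.2 = -1) ∨
      ((n.1 : Int) - cur.1 = 1 ∧ (n.2 : Int) - cur.2 = 0) ∨
      ((n.1 : Int) - cur.1 = -1 ∧ (n.2 : Int) - cur.2 = 0)) : pvAdj maps cur n := by
  rcases hd with ⟨h1, h2⟩ | ⟨h1, h2⟩ | ⟨h1, h2⟩ | ⟨h1, h2⟩
  · exact pvAdj_of_nbr hcur hn (Or.inl (Prod.ext (by omega) (by omega)))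
  · exact pvAdj_of_nbr hcur hn (Or.inr (Or.inr (Or.inl (Prod.ext (by omega) (by omega)))))
  · exact pvAdj_of_nbr hcur hn (Or.inr (Or.inl (Prod.ext (by omega) (by omega))))
  · exact pvAdj_of_nbr hcur hn (Or.inr (Or.inr (Or.inr (Prod.ext (by omega) (by omega)))))

theorem pvMid_nbr_ext {maps : List String} {v0 : List (List Bool)} {seed cur : Nat × Nat}
    {fuel k : Nat} {st : PvSt} (h : pvMidInv maps v0 seed cur fuel k st)
    (hnew : ∀ q' : Nat × Nat, pvOk maps q' →
      ((q'.1 : Int), (q'.2 : Int)) = pvNbrI ((cur.1 : Int), (cur.2 : Int)) k →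
      pvVisP st.vis q' = true) :
    pvMidInv maps v0 seed cur fuel (k + 1) st := by
  obtain ⟨hcore, hcl, hnbr, hm⟩ := h
  refine ⟨hcore, hcl, ?_, hm⟩
  intro j hj q' hok' heq
  rcases Nat.lt_or_ge j k with hjk | hjk
  · exact hnbr j hjk q' hok' heq
  · have : j = k := by omega
    exact hnew q' hok' (this ▸ heq)

theorem pvMid_markX {maps : List String} {v0 : List (List Bool)} {seed cur : Nat × Nat}
    {fuel k : Nat} {st : PvSt} (h : pvMidInv maps v0 seed cur fuel k st)
    (n : Nat × Nat) (hn1 : n.1 < maps.length) (hn2 : n.2 < (maps.getD 0 "").length)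
    (hnok : ¬ pvOk maps n)
    (hnb : ∀ q' : Nat × Nat, pvOk maps q' →
      ((q'.1 : Int), (q'.2 : Int)) = pvNbrI ((cur.1 : Int), (cur.2 : Int)) k → q' = n) :
    pvMidInv maps v0 seed cur fuel (k + 1)
      { vis := pvMark st.vis n.1 n.2, q := st.q, s := st.s } := by
  obtain ⟨⟨hsh, hmono, hq, hnewconn, hseednew, hsum⟩, hcl, hnbr, hm⟩ := h
  have hvis : ∀ p : Nat × Nat, pvVisP (pvMark st.vis n.1 n.2) p =
      if p = n then true else pvVisP st.vis p := by
    intro p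
    unfold pvVisP
    rw [pvVis_mark ⟨hsh.1, hsh.2⟩ hn1 hn2]
    by_cases hpn : p = n
    · simp [hpn]
    · have : ¬(p.1 = n.1 ∧ p.2 = n.2) := fun hc => hpn (Prod.ext hc.1 hc.2)
      simp [this, hpn]
  have hvmono : ∀ p : Nat × Nat, pvVisP st.vis p = true → pvVisP (pvMark st.vis n.1 n.2) p = true := by
    intro p hp
    rw [hvis]
    split <;> simp [hp]
  have hneweq : ∀ p, pvNew maps v0 (pvMark st.vis n.1 n.2) p ↔ pvNew maps v0 st.vis p := by
    intro p
    unfold pvNew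
    rw [hvis]
    by_cases hpn : p = n
    · subst hpn; simp [hnok]
    · simp [hpn]
  have hnewBeq : ∀ p, pvNewB maps v0 (pvMark st.vis n.1 n.2) p = pvNewB maps v0 st.vis p := by
    intro p
    by_cases hb : pvNew maps v0 st.vis p
    · rw [pvNewB_eq.2 ((hneweq p).2 hb), pvNewB_eq.2 hb]
    · have t1 : pvNewB maps v0 (pvMark st.vis n.1 n.2) p = false :=
        Bool.eq_false_iff.2 (fun hh => hb ((hneweq p).1 (pvNewB_eq.1 hh)))
      have t2 : pvNewB maps v0 st.vis p = false :=
        Bool.eq_false_iff.2 (fun hh => hb (pvNewB_eq.1 hh))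
      rw [t1, t2]
  refine ⟨⟨pvShape_mark ⟨hsh.1, hsh.2⟩, ?_, ?_, ?_, ?_, ?_⟩, ?_, ?_, ?_⟩
  · exact fun p hp => hvmono p (hmono p hp)
  · intro x hx
    obtain ⟨p, rfl, hp⟩ := hq x hx
    exact ⟨p, rfl, (hneweq p).2 hp⟩
  · exact fun p hp => hnewconn p ((hneweq p).1 hp)
  · exact (hneweq seed).2 hseednew
  · show st.s = _
    rw [hsum]
    congr 1
    exact (List.filter_congr (fun p _ => (hnewBeq p).symm)).symm ▸ rfl
  · intro p hp hqmem hpc q' hadj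
    exact hvmono q' (hcl p ((hneweq p).1 hp) hqmem hpc q' hadj)
  · intro j hj q' hok' heq
    rcases Nat.lt_or_ge j k with hjk | hjk
    · exact hvmono q' (hnbr j hjk q' hok' heq)
    · have hje : j = k := by omega
      exact absurd ((hnb q' hok' (hje ▸ heq)) ▸ hok') hnok
  · show st.q.length + pvUnvisCount maps (pvMark st.vis n.1 n.2) ≤ fuel
    have : pvUnvisCount maps (pvMark st.vis n.1 n.2) = pvUnvisCount maps st.vis := by
      unfold pvUnvisCount
      congr 1
      apply List.filter_congr
      intro p _
      by_cases hpn : p = n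
      · subst hpn
        have : pvOkb maps p = false := by simp [pvOkb, hnok]
        simp [this]
      · rw [hvis]; simp [hpn]
    omega

theorem pvMid_markOk {maps : List String} {v0 : List (List Bool)} {seed cur : Nat × Nat}
    (hv0cl : pvV0Closed maps v0) (hs0 : pvVisP v0 seed = false)
    (hcurconn : pvConn maps seed cur)
    {fuel k : Nat} {st : PvSt} (h : pvMidInv maps v0 seed cur fuel k st)
    (n : Nat × Nat) (hnok : pvOk maps n) (hvf : pvVisP st.vis n = false)
    (hadj : pvAdj maps cur n)
    (hnb : ∀ q' : Nat × Nat, pvOk maps q' →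
      ((q'.1 : Int), (q'.2 : Int)) = pvNbrI ((cur.1 : Int), (cur.2 : Int)) k → q' = n) :
    pvMidInv maps v0 seed cur fuel (k + 1)
      { vis := pvMark st.vis n.1 n.2, q := st.q ++ [((n.1 : Int), (n.2 : Int))],
        s := st.s + pvValAt maps n } := by
  obtain ⟨⟨hsh, hmono, hq, hnewconn, hseednew, hsum⟩, hcl, hnbr, hm⟩ := h
  have hconn_n : pvConn maps seed n := hcurconn.trans _ _ _ (pvAdj_conn hadj)
  have hv0n : pvVisP v0 n = false := pv_disjoint hv0cl hs0 hconn_n hnok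
  have hvis : ∀ p : Nat × Nat, pvVisP (pvMark st.vis n.1 n.2) p =
      if p = n then true else pvVisP st.vis p := by
    intro p
    unfold pvVisP
    rw [pvVis_mark ⟨hsh.1, hsh.2⟩ hnok.1 hnok.2.1]
    by_cases hpn : p = n
    · simp [hpn]
    · have : ¬(p.1 = n.1 ∧ p.2 = n.2) := fun hc => hpn (Prod.ext hc.1 hc.2)
      simp [this, hpn]
  have hvmono : ∀ p : Nat × Nat, pvVisP st.vis p = true → pvVisP (pvMark st.vis n.1 n.2) p = true := by
    intro p hp
    rw [hvis]
    split <;> simp [hp]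
  have hnew_n : pvNew maps v0 (pvMark st.vis n.1 n.2) n := by
    refine ⟨hnok, ?_, hv0n⟩
    rw [hvis]; simp
  have hnew' : ∀ p, pvNew maps v0 (pvMark st.vis n.1 n.2) p ↔
      pvNew maps v0 st.vis p ∨ p = n := by
    intro p
    by_cases hpn : p = n
    · subst hpn
      simp [hnew_n]
    · unfold pvNew
      rw [hvis]
      simp [hpn]
  have hnewB_old : pvNewB maps v0 st.vis n = false := by
    rcases Bool.eq_false_or_eq_true (pvNewB maps v0 st.vis n) with h0 | h0
    · exact absurd (pvNewB_eq.1 h0).2.1 (by simp [hvf])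
    · exact h0
  have hnewB_new : pvNewB maps v0 (pvMark st.vis n.1 n.2) n = true :=
    pvNewB_eq.2 hnew_n
  have hnewB_agree : ∀ p, p ≠ n →
      pvNewB maps v0 (pvMark st.vis n.1 n.2) p = pvNewB maps v0 st.vis p := by
    intro p hpn
    unfold pvNewB pvVisP
    unfold pvVisP at hvis
    rw [hvis p]
    simp [hpn]
  refine ⟨⟨pvShape_mark ⟨hsh.1, hsh.2⟩, ?_, ?_, ?_, ?_, ?_⟩, ?_, ?_, ?_⟩
  · exact fun p hp => hvmono p (hmono p hp)
  · intro x hx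
    rcases List.mem_append.1 hx with hx | hx
    · obtain ⟨p, rfl, hp⟩ := hq x hx
      exact ⟨p, rfl, (hnew' p).2 (Or.inl hp)⟩
    · refine ⟨n, List.mem_singleton.1 hx, hnew_n⟩
  · intro p hp
    rcases (hnew' p).1 hp with hp | rfl
    · exact hnewconn p hp
    · exact hconn_n
  · exact (hnew' seed).2 (Or.inl hseednew)
  · show st.s + pvValAt maps n = _
    rw [hsum]
    exact (pv_filter_flip_sum (pvValAt maps) _ nodup_pvCells _ _ n
      (mem_pvCells.2 ⟨hnok.1, hnok.2.1⟩) hnewB_old hnewB_new hnewB_agree).symm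
  · intro p hp hqmem hpc q' hadj'
    have hpn : p ≠ n := by
      intro hc
      exact hqmem (by rw [hc]; exact List.mem_append.2 (Or.inr (List.mem_singleton.2 rfl)))
    have hp' : pvNew maps v0 st.vis p := by
      rcases (hnew' p).1 hp with h0 | h0
      · exact h0
      · exact absurd h0 hpn
    refine hvmono q' (hcl p hp' ?_ hpc q' hadj')
    intro hc
    exact hqmem (List.mem_append.2 (Or.inl hc))
  · intro j hj q' hok' heq
    rcases Nat.lt_or_ge j k with hjk | hjk
    · exact hvmono q' (hnbr j hjk q' hok' heq)
    · have hje : j = k := by omega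
      rw [hnb q' hok' (hje ▸ heq), hvis]
      simp
  · show (st.q ++ [((n.1 : Int), (n.2 : Int))]).length + pvUnvisCount maps (pvMark st.vis n.1 n.2) ≤ fuel
    rw [List.length_append]
    have hcnt : pvUnvisCount maps st.vis = pvUnvisCount maps (pvMark st.vis n.1 n.2) + 1 := by
      unfold pvUnvisCount
      refine pv_filter_flip_length _ nodup_pvCells _ _ n (mem_pvCells.2 ⟨hnok.1, hnok.2.1⟩)
        ?_ ?_ ?_
      · simp only [pvOkb, Bool.and_eq_true, decide_eq_true_eq, Bool.not_eq_true']
        exact ⟨hnok, hvf⟩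
      · rw [hvis n]
        simp
      · intro y hyn
        rw [hvis y]
        simp [hyn]
    simp only [List.length_singleton]
    omega

theorem pvStep_mid {maps : List String} {v0 : List (List Bool)} {seed cur : Nat × Nat}
    (hv0cl : pvV0Closed maps v0) (hs0 : pvVisP v0 seed = false)
    (hcurok : pvOk maps cur) (hcurconn : pvConn maps seed cur)
    {fuel k : Nat} (hk : k < 4) {st : PvSt}
    (h : pvMidInv maps v0 seed cur fuel k st) :
    pvMidInv maps v0 seed cur fuel (k + 1)
      (pvBfsStep maps maps.length (maps.getD 0 "").length ((cur.1 : Int), (cur.2 : Int)) st k) := by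
  have hdir : (pvGoRow.getD k 0 = 0 ∧ pvGoCol.getD k 0 = 1) ∨
      (pvGoRow.getD k 0 = 0 ∧ pvGoCol.getD k 0 = -1) ∨
      (pvGoRow.getD k 0 = 1 ∧ pvGoCol.getD k 0 = 0) ∨
      (pvGoRow.getD k 0 = -1 ∧ pvGoCol.getD k 0 = 0) := by
    interval_cases k
    · exact Or.inl ⟨rfl, rfl⟩
    · exact Or.inr (Or.inl ⟨rfl, rfl⟩)
    · exact Or.inr (Or.inr (Or.inl ⟨rfl, rfl⟩))
    · exact Or.inr (Or.inr (Or.inr ⟨rfl, rfl⟩))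
  unfold pvBfsStep
  set nr : Int := (cur.1 : Int) + pvGoRow.getD k 0 with hnr
  set nc : Int := (cur.2 : Int) + pvGoCol.getD k 0 with hnc
  have hnbrI : pvNbrI ((cur.1 : Int), (cur.2 : Int)) k = (nr, nc) := rfl
  dsimp only
  split_ifs with hguard hcell
  · -- in range, not visited, non-'X': enqueue and add
    obtain ⟨hnc0, hncC, hnr0, hnrR, hvf⟩ := hguard
    set n : Nat × Nat := (nr.toNat, nc.toNat) with hn
    have hcast : ((n.1 : Int), (n.2 : Int)) = (nr, nc) := by
      rw [hn]
      simp only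
      rw [Int.toNat_of_nonneg hnr0, Int.toNat_of_nonneg hnc0]
    have hnok : pvOk maps n := by
      refine ⟨?_, ?_, hcell⟩
      · rw [hn]; simp only; omega
      · rw [hn]; simp only; omega
    have hnb : ∀ q' : Nat × Nat, pvOk maps q' →
        ((q'.1 : Int), (q'.2 : Int)) = pvNbrI ((cur.1 : Int), (cur.2 : Int)) k → q' = n := by
      intro q' _ heq
      rw [hnbrI] at heq
      exact pv_cast_pair_inj (heq.trans hcast.symm)
    have hadj : pvAdj maps cur n := by
      refine pv_adj_of_delta hcurok hnok ?_
      have h1 : (n.1 : Int) = nr := congrArg Prod.fst hcast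
      have h2 : (n.2 : Int) = nc := congrArg Prod.snd hcast
      rcases hdir with ⟨hd1, hd2⟩ | ⟨hd1, hd2⟩ | ⟨hd1, hd2⟩ | ⟨hd1, hd2⟩ <;>
        rw [hd1] at hnr <;> rw [hd2] at hnc <;>
        [exact Or.inl ⟨by omega, by omega⟩;
         exact Or.inr (Or.inl ⟨by omega, by omega⟩);
         exact Or.inr (Or.inr (Or.inl ⟨by omega, by omega⟩));
         exact Or.inr (Or.inr (Or.inr ⟨by omega, by omega⟩))]
    have hres := pvMid_markOk hv0cl hs0 hcurconn h n hnok hvf hadj hnb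
    have hqeq : (nr, nc) = ((n.1 : Int), (n.2 : Int)) := hcast.symm
    rw [hqeq]
    exact hres
  · -- in range, not visited, 'X': only mark
    obtain ⟨hnc0, hncC, hnr0, hnrR, hvf⟩ := hguard
    set n : Nat × Nat := (nr.toNat, nc.toNat) with hn
    have hcast : ((n.1 : Int), (n.2 : Int)) = (nr, nc) := by
      rw [hn]
      simp only
      rw [Int.toNat_of_nonneg hnr0, Int.toNat_of_nonneg hnc0]
    have hnok : ¬ pvOk maps n := fun hc => hcell hc.2.2
    have hnb : ∀ q' : Nat × Nat, pvOk maps q' →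
        ((q'.1 : Int), (q'.2 : Int)) = pvNbrI ((cur.1 : Int), (cur.2 : Int)) k → q' = n := by
      intro q' _ heq
      rw [hnbrI] at heq
      exact pv_cast_pair_inj (heq.trans hcast.symm)
    exact pvMid_markX h n (by rw [hn]; simp only; omega) (by rw [hn]; simp only; omega) hnok hnb
  · -- out of range or already visited: nothing happens
    refine pvMid_nbr_ext h ?_
    intro q' hok' heq
    rw [hnbrI] at heq
    have h1 : (q'.1 : Int) = nr := congrArg Prod.fst heq
    have h2 : (q'.2 : Int) = nc := congrArg Prod.snd heq
    have hb1 : (0 : Int) ≤ nc := by omega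
    have hb2 : nc < ((maps.getD 0 "").length : Int) := by
      have := hok'.2.1; omega
    have hb3 : (0 : Int) ≤ nr := by omega
    have hb4 : nr < (maps.length : Int) := by
      have := hok'.1; omega
    have htn1 : nr.toNat = q'.1 := by omega
    have htn2 : nc.toNat = q'.2 := by omega
    rcases Bool.eq_false_or_eq_true (pvVis st.vis nr.toNat nc.toNat) with hv | hv
    · show pvVis st.vis q'.1 q'.2 = true
      rw [← htn1, ← htn2]
      exact hv
    · exact absurd ⟨hb1, hb2, hb3, hb4, hv⟩ hguard

theorem pvMid_four {maps : List String} {v0 : List (List Bool)} {seed cur : Nat × Nat}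
    (hv0cl : pvV0Closed maps v0) (hs0 : pvVisP v0 seed = false)
    (hcurok : pvOk maps cur) (hcurconn : pvConn maps seed cur)
    {fuel : Nat} {st : PvSt} (h : pvMidInv maps v0 seed cur fuel 0 st) :
    pvMidInv maps v0 seed cur fuel 4
      ((List.range 4).foldl
        (fun s k => pvBfsStep maps maps.length (maps.getD 0 "").length
          ((cur.1 : Int), (cur.2 : Int)) s k) st) := by
  have h1 := pvStep_mid hv0cl hs0 hcurok hcurconn (by omega : (0:Nat) < 4) h
  have h2 := pvStep_mid hv0cl hs0 hcurok hcurconn (by omega : (1:Nat) < 4) h1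
  have h3 := pvStep_mid hv0cl hs0 hcurok hcurconn (by omega : (2:Nat) < 4) h2
  have h4 := pvStep_mid hv0cl hs0 hcurok hcurconn (by omega : (3:Nat) < 4) h3
  simpa [List.range_succ] using h4

theorem pvMid_to_inv {maps : List String} {v0 : List (List Bool)} {seed cur : Nat × Nat}
    {fuel : Nat} {st : PvSt} (h : pvMidInv maps v0 seed cur fuel 4 st) :
    pvInv maps v0 seed fuel st := by
  obtain ⟨hcore, hcl, hnbr, hm⟩ := h
  refine ⟨hcore, ?_, hm⟩
  intro p hp hq q' hadj
  by_cases hpc : p = cur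
  · subst hpc
    have hok' := (pvAdj_ok hadj).2
    rcases pvAdj_elim hadj with h4 | h4 | h4 | h4
    · refine hnbr 0 (by omega) q' hok' ?_
      rw [pvNbrI_zero, h4, Prod.mk.injEq]
      constructor <;> push_cast <;> ring
    · refine hnbr 2 (by omega) q' hok' ?_
      rw [pvNbrI_two, h4, Prod.mk.injEq]
      constructor <;> push_cast <;> ring
    · refine hnbr 1 (by omega) q' hok' ?_
      have h1 : p.1 = q'.1 := by rw [h4]
      have h2 : p.2 = q'.2 + 1 := by rw [h4]
      rw [pvNbrI_one, Prod.mk.injEq]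
      constructor <;> [omega; skip]
      simp only
      omega
    · refine hnbr 3 (by omega) q' hok' ?_
      have h1 : p.1 = q'.1 + 1 := by rw [h4]
      have h2 : p.2 = q'.2 := by rw [h4]
      rw [pvNbrI_three, Prod.mk.injEq]
      constructor <;> [skip; omega]
      simp only
      omega
  · exact hcl p hp hq hpc q' hadj

-- conclusions drawn from a terminal (empty-queue) state
def pvPost (maps : List String) (v0 : List (List Bool)) (seed : Nat × Nat) (st : PvSt) : Prop :=
  pvShape st.vis maps.length (maps.getD 0 "").length ∧
  (∀ p : Nat × Nat, pvVisP v0 p = true → pvVisP st.vis p = true) ∧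
  (∀ p : Nat × Nat, pvOk maps p →
    (pvVisP st.vis p = true ↔ pvVisP v0 p = true ∨ pvConn maps seed p)) ∧
  (∀ p q', pvOk maps p → pvVisP st.vis p = true → pvAdj maps p q' → pvVisP st.vis q' = true) ∧
  st.s = pvClassSum maps seed

theorem pvInv_final {maps : List String} {v0 : List (List Bool)} {seed : Nat × Nat}
    (hv0cl : pvV0Closed maps v0) (hs0 : pvVisP v0 seed = false)
    {fuel : Nat} {st : PvSt} (h : pvInv maps v0 seed fuel st) (hq : st.q = []) :
    pvPost maps v0 seed st := by
  obtain ⟨⟨hsh, hmono, _, hnewconn, hseednew, hsum⟩, hcl, _⟩ := h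
  have hclosed : ∀ p, pvNew maps v0 st.vis p → ∀ q', pvAdj maps p q' → pvVisP st.vis q' = true :=
    fun p hp q' => hcl p hp (by simp [hq]) q'
  have hMcl : ∀ a b, pvNew maps v0 st.vis a → pvAdj maps a b → pvNew maps v0 st.vis b := by
    intro a b ha hab
    have hokb := (pvAdj_ok hab).2
    refine ⟨hokb, hclosed a ha b hab, ?_⟩
    exact pv_disjoint hv0cl hs0 ((hnewconn a ha).trans _ _ _ (pvAdj_conn hab)) hokb
  have hcomplete : ∀ p, pvConn maps seed p → pvNew maps v0 st.vis p :=
    fun p hc => (pv_conn_mem_iff hMcl hc).1 hseednew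
  refine ⟨hsh, hmono, ?_, ?_, ?_⟩
  · intro p hok
    constructor
    · intro hv
      rcases Bool.eq_false_or_eq_true (pvVisP v0 p) with h0 | h0
      · exact Or.inl h0
      · exact Or.inr (hnewconn p ⟨hok, hv, h0⟩)
    · rintro (hv | hc)
      · exact hmono p hv
      · exact (hcomplete p hc).2.1
  · intro p q' hok hv hadj
    rcases Bool.eq_false_or_eq_true (pvVisP v0 p) with h0 | h0
    · exact hmono q' (hv0cl p q' hok h0 hadj)
    · exact hclosed p ⟨hok, hv, h0⟩ q' hadj
  · rw [hsum]
    unfold pvClassSum pvClassMembers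
    congr 2
    apply List.filter_congr
    intro p _
    by_cases hok : pvOk maps p
    · by_cases hc : pvConn maps seed p
      · have hn := hcomplete p hc
        have h1 : @decide (pvConn maps seed p) (Classical.propDecidable _) = true :=
          @decide_eq_true (pvConn maps seed p) (Classical.propDecidable _) hc
        rw [pvNewB]
        simp [pvOkb, hok, hn.2.1, hn.2.2, h1]
      · have hn : pvNewB maps v0 st.vis p = false := by
          rcases Bool.eq_false_or_eq_true (pvNewB maps v0 st.vis p) with h0 | h0
          · exact absurd (hnewconn p (pvNewB_eq.1 h0)) hc
          · exact h0
        rw [hn]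
        have h1 : @decide (pvConn maps seed p) (Classical.propDecidable _) = false :=
          @decide_eq_false (pvConn maps seed p) (Classical.propDecidable _) hc
        simp [h1]
    · rw [pvNewB]
      simp [pvOkb, hok]

theorem pvBfs_run {maps : List String} {v0 : List (List Bool)} {seed : Nat × Nat}
    (hv0cl : pvV0Closed maps v0) (hs0 : pvVisP v0 seed = false) :
    ∀ (fuel : Nat) (st : PvSt), pvInv maps v0 seed fuel st →
      pvPost maps v0 seed (pvBfsLoop maps maps.length (maps.getD 0 "").length fuel st) := by
  intro fuel
  induction fuel with
  | zero =>
    intro st h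
    have hq : st.q = [] := by
      have := h.2.2
      simp only [Nat.le_zero, Nat.add_eq_zero] at this
      exact List.length_eq_zero_iff.1 this.1
    exact pvInv_final hv0cl hs0 h hq
  | succ fuel ih =>
    intro st h
    unfold pvBfsLoop
    cases hq : st.q with
    | nil => exact pvInv_final hv0cl hs0 h hq
    | cons cur0 rest =>
      obtain ⟨hcore, hcl, hm⟩ := h
      obtain ⟨p, rfl, hpnew⟩ := hcore.2.2.1 cur0 (by rw [hq]; exact List.mem_cons_self)
      have hcurok := hpnew.1
      have hcurconn := hcore.2.2.2.1 p hpnew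
      have hmid : pvMidInv maps v0 seed p fuel 0 { st with q := rest } := by
        refine ⟨⟨hcore.1, hcore.2.1, ?_, hcore.2.2.2.1, hcore.2.2.2.2.1, hcore.2.2.2.2.2⟩,
          ?_, ?_, ?_⟩
        · intro x hx
          exact hcore.2.2.1 x (by rw [hq]; exact List.mem_cons_of_mem _ hx)
        · intro p' hp' hq' hpc q' hadj
          refine hcl p' hp' ?_ q' hadj
          rw [hq]
          intro hmem
          rcases List.mem_cons.1 hmem with he | he
          · exact hpc (by
              have h1 := congrArg Prod.fst he
              have h2 := congrArg Prod.snd he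
              simp only at h1 h2
              exact Prod.ext (by exact_mod_cast h1) (by exact_mod_cast h2))
          · exact hq' he
        · intro j hj; omega
        · have hlen : st.q.length = rest.length + 1 := by rw [hq]; simp
          show rest.length + pvUnvisCount maps st.vis ≤ fuel
          omega
      have h4 := pvMid_four hv0cl hs0 hcurok hcurconn hmid
      exact ih _ (pvMid_to_inv h4)


-- ---------- outer scan (A side) ----------
theorem pvInv_init {maps : List String} {v0 : List (List Bool)} {p : Nat × Nat}
    (hsh : pvShape v0 maps.length (maps.getD 0 "").length)
    (hok : pvOk maps p) (hs0 : pvVisP v0 p = false) :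
    pvInv maps v0 p (maps.length * (maps.getD 0 "").length + 1)
      { vis := pvMark v0 p.1 p.2, q := [((p.1 : Int), (p.2 : Int))], s := pvValAt maps p } := by
  have hvis : ∀ q : Nat × Nat, pvVisP (pvMark v0 p.1 p.2) q =
      if q = p then true else pvVisP v0 q := by
    intro q
    unfold pvVisP
    rw [pvVis_mark hsh hok.1 hok.2.1]
    by_cases hqp : q = p
    · simp [hqp]
    · have : ¬(q.1 = p.1 ∧ q.2 = p.2) := fun hc => hqp (Prod.ext hc.1 hc.2)
      simp [this, hqp]
  have hnew : ∀ q, pvNew maps v0 (pvMark v0 p.1 p.2) q ↔ q = p := by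
    intro q
    unfold pvNew
    rw [hvis]
    by_cases hqp : q = p
    · simp [hqp, hs0]
      exact hok
    · simp only [if_neg hqp]
      constructor
      · rintro ⟨_, h1, h2⟩; rw [h1] at h2; exact absurd h2 (by simp)
      · intro h; exact absurd h hqp
  refine ⟨⟨pvShape_mark hsh, ?_, ?_, ?_, ?_, ?_⟩, ?_, ?_⟩
  · intro q hq
    rw [hvis]
    split <;> simp [hq]
  · intro x hx
    rw [List.mem_singleton] at hx
    exact ⟨p, hx, (hnew p).2 rfl⟩
  · intro q hq
    rw [hnew q] at hq
    exact hq ▸ Relation.EqvGen.refl _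
  · exact (hnew p).2 rfl
  · show pvValAt maps p = _
    have hbase : (((pvCells maps.length (maps.getD 0 "").length).filter
        (pvNewB maps v0 v0)).map (pvValAt maps)).sum = 0 := by
      have : (pvCells maps.length (maps.getD 0 "").length).filter (pvNewB maps v0 v0) = [] := by
        rw [List.filter_congr (q := fun _ => false) ?_, List.filter_false]
        intro q _
        rcases Bool.eq_false_or_eq_true (pvNewB maps v0 v0 q) with h0 | h0
        · obtain ⟨_, h1, h2⟩ := pvNewB_eq.1 h0
          rw [h1] at h2
          exact absurd h2 (by simp)
        · exact h0
      rw [this]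
      rfl
    have hflip := pv_filter_flip_sum (pvValAt maps) _ (nodup_pvCells
      (R := maps.length) (C := (maps.getD 0 "").length))
      (pvNewB maps v0 v0) (pvNewB maps v0 (pvMark v0 p.1 p.2)) p
      (mem_pvCells.2 ⟨hok.1, hok.2.1⟩)
      (by
        rcases Bool.eq_false_or_eq_true (pvNewB maps v0 v0 p) with h0 | h0
        · obtain ⟨_, h1, h2⟩ := pvNewB_eq.1 h0
          rw [h1] at h2
          exact absurd h2 (by simp)
        · exact h0)
      (pvNewB_eq.2 ((hnew p).2 rfl))
      (by
        intro y hyp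
        unfold pvNewB
        unfold pvVisP at hvis ⊢
        rw [hvis y]
        simp [hyp])
    rw [hflip, hbase, zero_add]
  · intro q hq hmem
    rw [hnew q] at hq
    subst hq
    exact absurd (List.mem_singleton.2 rfl) hmem
  · show 1 + pvUnvisCount maps (pvMark v0 p.1 p.2) ≤ _
    have h1 : pvUnvisCount maps (pvMark v0 p.1 p.2) ≤ maps.length * (maps.getD 0 "").length := by
      unfold pvUnvisCount
      calc _ ≤ (pvCells maps.length (maps.getD 0 "").length).length := List.length_filter_le _ _
      _ = _ := length_pvCells
    omega

def pvOInv (maps : List String) (pfx : List (Nat × Nat)) (ac : List (List Bool) × List Int) : Prop :=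
  pvShape ac.1 maps.length (maps.getD 0 "").length ∧
  (∀ p : Nat × Nat, pvOk maps p →
    (pvVisP ac.1 p = true ↔ ∃ q ∈ pfx, pvOk maps q ∧ pvConn maps q p)) ∧
  pvV0Closed maps ac.1 ∧
  ac.2 = (pfx.filter (pvIsRepB maps)).map (pvClassSum maps)

theorem pvOInv_step {maps : List String} {pfx : List (Nat × Nat)} {ac : List (List Bool) × List Int}
    {p : Nat × Nat} (hmem : p ∈ pvCells maps.length (maps.getD 0 "").length)
    (hlt : ∀ q ∈ pfx, pvLexLt q p = true)
    (hcompl : ∀ q, pvOk maps q → pvLexLt q p = true → q ∈ pfx)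
    (h : pvOInv maps pfx ac) :
    pvOInv maps (pfx ++ [p]) (pvCellStep maps maps.length (maps.getD 0 "").length ac p) := by
  obtain ⟨hsh, hiff, hcl, hans⟩ := h
  obtain ⟨hp1, hp2⟩ := mem_pvCells.1 hmem
  unfold pvCellStep
  dsimp only
  by_cases hvis : pvVis ac.1 p.1 p.2
  · -- already visited: skip
    rw [if_pos hvis]
    have hexists : ∀ p' : Nat × Nat, pvOk maps p' →
        ((∃ q ∈ pfx ++ [p], pvOk maps q ∧ pvConn maps q p') ↔
          (∃ q ∈ pfx, pvOk maps q ∧ pvConn maps q p')) := by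
      intro p' hok'
      constructor
      · rintro ⟨q, hq, hqok, hqc⟩
        rcases List.mem_append.1 hq with hq | hq
        · exact ⟨q, hq, hqok, hqc⟩
        · rw [List.mem_singleton.1 hq] at hqok hqc
          obtain ⟨q0, hq0, hq0ok, hq0c⟩ := (hiff p hqok).1 hvis
          exact ⟨q0, hq0, hq0ok, hq0c.trans _ _ _ hqc⟩
      · rintro ⟨q, hq, hqok, hqc⟩
        exact ⟨q, List.mem_append.2 (Or.inl hq), hqok, hqc⟩
    have hnotrep : pvIsRepB maps p = false := by
      rcases Bool.eq_false_or_eq_true (pvIsRepB maps p) with h0 | h0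
      · obtain ⟨hok, hnone⟩ := pvIsRepB_eq.1 h0
        obtain ⟨q0, hq0, hq0ok, hq0c⟩ := (hiff p hok).1 hvis
        exact absurd ⟨hq0ok, hq0c⟩ (hnone q0 (hlt q0 hq0))
      · exact h0
    refine ⟨hsh, ?_, hcl, ?_⟩
    · intro p' hok'
      rw [hiff p' hok', hexists p' hok']
    · rw [List.filter_append]
      simp [hnotrep, hans]
  · rw [if_neg hvis]
    by_cases hcell : pvCell maps p.1 p.2 ≠ 'X'
    · -- start a BFS from the fresh cell p
      rw [if_pos hcell]
      rw [show pvVal (pvCell maps p.1 p.2) = pvValAt maps p from rfl]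
      have hok : pvOk maps p := ⟨hp1, hp2, hcell⟩
      have hs0 : pvVisP ac.1 p = false := Bool.eq_false_iff.2 hvis
      have hrep : pvIsRep maps p := by
        refine ⟨hok, ?_⟩
        intro q hq hcq
        have hqpfx := hcompl q hcq.1 hq
        exact (by simpa [hs0] using (hiff p hok).2 ⟨q, hqpfx, hcq.1, hcq.2⟩ : False)
      have hpost := pvBfs_run hcl hs0 _ _ (pvInv_init ⟨hsh.1, hsh.2⟩ hok hs0)
      obtain ⟨psh, pmono, piff, pcl, psum⟩ := hpost
      refine ⟨psh, ?_, pcl, ?_⟩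
      · intro p' hok'
        dsimp only
        rw [piff p' hok', hiff p' hok']
        constructor
        · rintro (⟨q, hq, hqok, hqc⟩ | hc)
          · exact ⟨q, List.mem_append.2 (Or.inl hq), hqok, hqc⟩
          · exact ⟨p, List.mem_append.2 (Or.inr (List.mem_singleton.2 rfl)), hok, hc⟩
        · rintro ⟨q, hq, hqok, hqc⟩
          rcases List.mem_append.1 hq with hq | hq
          · exact Or.inl ⟨q, hq, hqok, hqc⟩
          · rw [List.mem_singleton.1 hq] at hqc
            exact Or.inr hqc
      · dsimp only
        rw [List.filter_append, hans, List.map_append]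
        congr 1
        rw [List.filter_singleton, pvIsRepB_eq.2 hrep, cond_true, List.map_singleton, psum]
    · -- an 'X' cell: skip
      rw [if_neg hcell]
      have hnok : ¬ pvOk maps p := fun hc => hcell hc.2.2
      have hnotrep : pvIsRepB maps p = false := by
        rcases Bool.eq_false_or_eq_true (pvIsRepB maps p) with h0 | h0
        · exact absurd (pvIsRepB_eq.1 h0).1 hnok
        · exact h0
      refine ⟨hsh, ?_, hcl, ?_⟩
      · intro p' hok'
        rw [hiff p' hok']
        constructor
        · rintro ⟨q, hq, hqok, hqc⟩
          exact ⟨q, List.mem_append.2 (Or.inl hq), hqok, hqc⟩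
        · rintro ⟨q, hq, hqok, hqc⟩
          rcases List.mem_append.1 hq with hq | hq
          · exact ⟨q, hq, hqok, hqc⟩
          · rw [List.mem_singleton.1 hq] at hqok
            exact absurd hqok hnok
      · rw [List.filter_append]
        simp [hnotrep, hans]

theorem pvOuter_run {maps : List String} :
    ∀ (suffix pfx : List (Nat × Nat)) (ac : List (List Bool) × List Int),
      pvCells maps.length (maps.getD 0 "").length = pfx ++ suffix →
      pvOInv maps pfx ac →
      pvOInv maps (pfx ++ suffix)
        (suffix.foldl (pvCellStep maps maps.length (maps.getD 0 "").length) ac) := by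
  intro suffix
  induction suffix with
  | nil => intro pfx ac _ h; simpa using h
  | cons p rest ih =>
    intro pfx ac hsplit h
    have hpair := pairwise_pvCells (R := maps.length) (C := (maps.getD 0 "").length)
    rw [hsplit, List.pairwise_append] at hpair
    have hmem : p ∈ pvCells maps.length (maps.getD 0 "").length := by
      rw [hsplit]; exact List.mem_append.2 (Or.inr List.mem_cons_self)
    have hlt : ∀ q ∈ pfx, pvLexLt q p = true :=
      fun q hq => hpair.2.2 q hq p List.mem_cons_self
    have hcompl : ∀ q, pvOk maps q → pvLexLt q p = true → q ∈ pfx := by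
      intro q hqok hqlt
      have hqc : q ∈ pvCells maps.length (maps.getD 0 "").length :=
        mem_pvCells.2 ⟨hqok.1, hqok.2.1⟩
      rw [hsplit] at hqc
      rcases List.mem_append.1 hqc with hq | hq
      · exact hq
      · rcases List.mem_cons.1 hq with rfl | hq
        · rw [pvLexLt_irrefl] at hqlt; exact absurd hqlt (by simp)
        · have := List.pairwise_cons.1 hpair.2.1 |>.1 q hq
          rw [pvLexLt_asymm this] at hqlt
          exact absurd hqlt (by simp)
    have hstep := pvOInv_step hmem hlt hcompl h
    have hres := ih (pfx ++ [p]) _ (by rw [hsplit]; simp) hstep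
    rw [List.foldl_cons]
    rw [List.append_assoc] at hres
    simpa using hres

noncomputable def pvSpec (maps : List String) : List Int :=
  if (pvSums maps).length = 0 then [-1] else PySem.List.sorted (pvSums maps) (fun x => x) false

theorem pvA_eq (maps : List String) : solution maps = pvSpec maps := by
  have h0 : pvOInv maps []
      (List.replicate maps.length (List.replicate (maps.getD 0 "").length false), []) := by
    refine ⟨pvShape_replicate, ?_, ?_, rfl⟩
    · intro p _
      unfold pvVisP
      rw [pvVis_replicate]
      simp
    · intro p q' _ hv _
      unfold pvVisP at hv
      rw [pvVis_replicate] at hv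
      exact absurd hv (by simp)
  have hrun := pvOuter_run (pvCells maps.length (maps.getD 0 "").length) [] _ (by simp) h0
  rw [List.nil_append] at hrun
  unfold solution pvSpec pvSums pvRepList
  dsimp only
  rw [hrun.2.2.2]


-- ---------- union-find analysis (B side) ----------
theorem pvLexLt_trans {p q r : Nat × Nat} (h1 : pvLexLt p q = true) (h2 : pvLexLt q r = true) :
    pvLexLt p r = true := by
  rcases p with ⟨a, b⟩; rcases q with ⟨c, d⟩; rcases r with ⟨e, f⟩
  simp [pvLexLt] at *
  omega

theorem pvLexLt_ne {p q : Nat × Nat} (h : pvLexLt p q = true) : p ≠ q := by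
  rintro rfl
  rw [pvLexLt_irrefl] at h
  exact absurd h (by simp)

def pvPar (d : PySem.Dict (Nat × Nat) (Nat × Nat)) (p : Nat × Nat) : Nat × Nat := d.getD p p

def pvUF (maps : List String) (d : PySem.Dict (Nat × Nat) (Nat × Nat)) : Prop :=
  (∀ p : Nat × Nat, d.contains p = true ↔ pvOk maps p) ∧
  (∀ p, pvOk maps p → pvOk maps (pvPar d p) ∧ (pvPar d p = p ∨ pvLexLt (pvPar d p) p = true))

theorem pvFind_succ (d : PySem.Dict (Nat × Nat) (Nat × Nat)) (fuel : Nat) (p : Nat × Nat) :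
    pvFind d (fuel + 1) p = if d.getD p p = p then p else pvFind d fuel (d.getD p p) := rfl

theorem pvFind_irrel {maps : List String} {d : PySem.Dict (Nat × Nat) (Nat × Nat)}
    (h : pvUF maps d) :
    ∀ (n : Nat) (p : Nat × Nat), pvOk maps p → pvRank (maps.getD 0 "").length p ≤ n →
      ∀ f1 f2, n < f1 → n < f2 → pvFind d f1 p = pvFind d f2 p := by
  intro n
  induction n using Nat.strong_induction_on with
  | _ n ih =>
    intro p hok hrank f1 f2 hf1 hf2
    obtain ⟨n1, rfl⟩ : ∃ m, f1 = m + 1 := ⟨f1 - 1, by omega⟩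
    obtain ⟨n2, rfl⟩ : ∃ m, f2 = m + 1 := ⟨f2 - 1, by omega⟩
    rw [pvFind_succ, pvFind_succ]
    by_cases hpar : d.getD p p = p
    · rw [if_pos hpar, if_pos hpar]
    · rw [if_neg hpar, if_neg hpar]
      obtain ⟨hokp, hlt⟩ := h.2 p hok
      rcases hlt with hlt | hlt
      · exact absurd hlt hpar
      · have hr : pvRank (maps.getD 0 "").length (pvPar d p) < pvRank (maps.getD 0 "").length p :=
          (pvLexLt_rank hokp.2.1 hok.2.1).1 hlt
        exact ih (pvRank (maps.getD 0 "").length (pvPar d p)) (by omega) (pvPar d p) hokp le_rfl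
          n1 n2 (by omega) (by omega)

def pvF (maps : List String) (d : PySem.Dict (Nat × Nat) (Nat × Nat)) (p : Nat × Nat) : Nat × Nat :=
  pvFind d (maps.length * (maps.getD 0 "").length + 1) p

theorem pvF_step {maps : List String} {d : PySem.Dict (Nat × Nat) (Nat × Nat)}
    (h : pvUF maps d) {p : Nat × Nat} (hok : pvOk maps p) :
    pvF maps d p = if pvPar d p = p then p else pvF maps d (pvPar d p) := by
  unfold pvF pvPar
  rw [pvFind_succ]
  by_cases hpar : d.getD p p = p
  · rw [if_pos hpar, if_pos hpar]
  · rw [if_neg hpar, if_neg hpar]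
    obtain ⟨hokp, hlt⟩ := h.2 p hok
    rcases hlt with hlt | hlt
    · exact absurd hlt hpar
    · have hr := pvRank_lt hokp
      exact pvFind_irrel h (pvRank (maps.getD 0 "").length (pvPar d p)) (pvPar d p) hokp le_rfl
        _ _ (by omega) (by omega)

theorem pvF_props {maps : List String} {d : PySem.Dict (Nat × Nat) (Nat × Nat)}
    (h : pvUF maps d) :
    ∀ (n : Nat) (p : Nat × Nat), pvOk maps p → pvRank (maps.getD 0 "").length p ≤ n →
      pvPar d (pvF maps d p) = pvF maps d p ∧ pvOk maps (pvF maps d p) ∧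
        (pvF maps d p = p ∨ pvLexLt (pvF maps d p) p = true) := by
  intro n
  induction n using Nat.strong_induction_on with
  | _ n ih =>
    intro p hok hrank
    rw [pvF_step h hok]
    by_cases hpar : pvPar d p = p
    · rw [if_pos hpar]
      exact ⟨hpar, hok, Or.inl rfl⟩
    · rw [if_neg hpar]
      obtain ⟨hokp, hlt⟩ := h.2 p hok
      rcases hlt with hlt | hlt
      · exact absurd hlt hpar
      · have hr : pvRank (maps.getD 0 "").length (pvPar d p) < pvRank (maps.getD 0 "").length p :=
          (pvLexLt_rank hokp.2.1 hok.2.1).1 hlt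
        obtain ⟨h1, h2, h3⟩ := ih (pvRank (maps.getD 0 "").length (pvPar d p)) (by omega)
          (pvPar d p) hokp le_rfl
        refine ⟨h1, h2, Or.inr ?_⟩
        rcases h3 with h3 | h3
        · rw [h3]; exact hlt
        · exact pvLexLt_trans h3 hlt

theorem pvF_root {maps : List String} {d : PySem.Dict (Nat × Nat) (Nat × Nat)}
    (h : pvUF maps d) {p : Nat × Nat} (hok : pvOk maps p) (hpar : pvPar d p = p) :
    pvF maps d p = p := by
  rw [pvF_step h hok, if_pos hpar]

theorem pvPar_insert (d : PySem.Dict (Nat × Nat) (Nat × Nat)) (rmax rmin x : Nat × Nat) :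
    pvPar (d.insert rmax rmin) x = if x = rmax then rmin else pvPar d x := by
  unfold pvPar
  rw [PySem.Dict.getD_insert]

theorem pvUF_insert {maps : List String} {d : PySem.Dict (Nat × Nat) (Nat × Nat)}
    (h : pvUF maps d) {rmax rmin : Nat × Nat} (hmaxok : pvOk maps rmax) (hminok : pvOk maps rmin)
    (hlt : pvLexLt rmin rmax = true) : pvUF maps (d.insert rmax rmin) := by
  constructor
  · intro p
    rw [PySem.Dict.contains_insert]
    by_cases hp : p = rmax
    · rw [hp]
      simp
      exact hmaxok
    · have : (p == rmax) = false := by simp [hp]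
      rw [this]
      simp only [Bool.false_or]
      exact h.1 p
  · intro p hok
    rw [pvPar_insert]
    by_cases hp : p = rmax
    · rw [if_pos hp]
      exact ⟨hminok, Or.inr (hp ▸ hlt)⟩
    · rw [if_neg hp]
      exact h.2 p hok

theorem pvF_insert {maps : List String} {d : PySem.Dict (Nat × Nat) (Nat × Nat)}
    (h : pvUF maps d) {rmax rmin : Nat × Nat} (hmaxok : pvOk maps rmax) (hminok : pvOk maps rmin)
    (hro : pvPar d rmax = rmax) (hri : pvPar d rmin = rmin) (hlt : pvLexLt rmin rmax = true) :
    ∀ (n : Nat) (p : Nat × Nat), pvOk maps p → pvRank (maps.getD 0 "").length p ≤ n →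
      pvF maps (d.insert rmax rmin) p = if pvF maps d p = rmax then rmin else pvF maps d p := by
  have huf' := pvUF_insert h hmaxok hminok hlt
  have hne : rmin ≠ rmax := pvLexLt_ne hlt
  intro n
  induction n using Nat.strong_induction_on with
  | _ n ih =>
    intro p hok hrank
    rw [pvF_step huf' hok, pvPar_insert]
    by_cases hp : p = rmax
    · rw [hp]
      rw [if_pos rfl, if_neg hne]
      have hFmin' : pvF maps (d.insert rmax rmin) rmin = rmin := by
        refine pvF_root huf' hminok ?_
        rw [pvPar_insert, if_neg hne, hri]
      rw [hFmin']
      rw [pvF_root h hmaxok hro, if_pos rfl]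
    · rw [if_neg hp]
      by_cases hpar : pvPar d p = p
      · rw [if_pos hpar]
        rw [pvF_root h hok hpar, if_neg hp]
      · rw [if_neg hpar]
        obtain ⟨hokp, hltp⟩ := h.2 p hok
        rcases hltp with hltp | hltp
        · exact absurd hltp hpar
        · have hr : pvRank (maps.getD 0 "").length (pvPar d p) < pvRank (maps.getD 0 "").length p :=
            (pvLexLt_rank hokp.2.1 hok.2.1).1 hltp
          rw [ih (pvRank (maps.getD 0 "").length (pvPar d p)) (by omega) (pvPar d p) hokp le_rfl]
          rw [pvF_step h hok, if_neg hpar]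

theorem pv_if_root_iff {α : Type} [DecidableEq α] (ra rb Fp Fq : α) (hne : ra ≠ rb) :
    ((if Fp = ra then rb else Fp) = (if Fq = ra then rb else Fq) ↔
      (Fp = Fq ∨ (Fp = ra ∧ Fq = rb) ∨ (Fp = rb ∧ Fq = ra))) := by
  split_ifs with h1 h2 h2 <;> constructor <;> intro hx <;>
    [skip; skip; skip; skip; skip; skip; skip; skip] <;> subst_vars <;> tauto

theorem pvUnion_spec {maps : List String} {d : PySem.Dict (Nat × Nat) (Nat × Nat)}
    (h : pvUF maps d) {a b : Nat × Nat} (ha : pvOk maps a) (hb : pvOk maps b) :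
    pvUF maps (pvUnion d (maps.length * (maps.getD 0 "").length + 1) a b) ∧
    ∀ p q, pvOk maps p → pvOk maps q →
      (pvF maps (pvUnion d (maps.length * (maps.getD 0 "").length + 1) a b) p =
        pvF maps (pvUnion d (maps.length * (maps.getD 0 "").length + 1) a b) q ↔
      (pvF maps d p = pvF maps d q ∨
        (pvF maps d p = pvF maps d a ∧ pvF maps d b = pvF maps d q) ∨
        (pvF maps d p = pvF maps d b ∧ pvF maps d a = pvF maps d q))) := by
  obtain ⟨hra_root, hra_ok, _⟩ := pvF_props h (pvRank (maps.getD 0 "").length a) a ha le_rfl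
  obtain ⟨hrb_root, hrb_ok, _⟩ := pvF_props h (pvRank (maps.getD 0 "").length b) b hb le_rfl
  unfold pvUnion
  dsimp only
  rw [show pvFind d (maps.length * (maps.getD 0 "").length + 1) a = pvF maps d a from rfl,
    show pvFind d (maps.length * (maps.getD 0 "").length + 1) b = pvF maps d b from rfl]
  by_cases heq : pvF maps d a = pvF maps d b
  · rw [if_pos heq]
    refine ⟨h, ?_⟩
    intro p q _ _
    constructor
    · exact Or.inl
    · rintro (hx | ⟨hx1, hx2⟩ | ⟨hx1, hx2⟩)
      · exact hx
      · rw [hx1, heq, hx2]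
      · rw [hx1, ← heq, hx2]
  · rw [if_neg heq]
    by_cases hlt : pvLexLt (pvF maps d b) (pvF maps d a) = true
    · rw [if_pos hlt]
      have hFins := pvF_insert h hra_ok hrb_ok hra_root hrb_root hlt
      refine ⟨pvUF_insert h hra_ok hrb_ok hlt, ?_⟩
      intro p q hp hq
      rw [hFins (pvRank (maps.getD 0 "").length p) p hp le_rfl,
        hFins (pvRank (maps.getD 0 "").length q) q hq le_rfl,
        pv_if_root_iff _ _ _ _ heq]
      constructor
      · rintro (hx | ⟨h1, h2⟩ | ⟨h1, h2⟩)
        exacts [Or.inl hx, Or.inr (Or.inl ⟨h1, h2.symm⟩), Or.inr (Or.inr ⟨h1, h2.symm⟩)]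
      · rintro (hx | ⟨h1, h2⟩ | ⟨h1, h2⟩)
        exacts [Or.inl hx, Or.inr (Or.inl ⟨h1, h2.symm⟩), Or.inr (Or.inr ⟨h1, h2.symm⟩)]
    · rw [if_neg hlt]
      have hlt' : pvLexLt (pvF maps d a) (pvF maps d b) = true := by
        rcases pvLexLt_trichotomy (pvF maps d a) (pvF maps d b) with h0 | h0 | h0
        · exact h0
        · exact absurd h0 heq
        · exact absurd h0 hlt
      have hFins := pvF_insert h hrb_ok hra_ok hrb_root hra_root hlt'
      refine ⟨pvUF_insert h hrb_ok hra_ok hlt', ?_⟩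
      intro p q hp hq
      rw [hFins (pvRank (maps.getD 0 "").length p) p hp le_rfl,
        hFins (pvRank (maps.getD 0 "").length q) q hq le_rfl,
        pv_if_root_iff _ _ _ _ (fun hc => heq hc.symm)]
      constructor
      · rintro (hx | ⟨h1, h2⟩ | ⟨h1, h2⟩)
        exacts [Or.inl hx, Or.inr (Or.inr ⟨h1, h2.symm⟩), Or.inr (Or.inl ⟨h1, h2.symm⟩)]
      · rintro (hx | ⟨h1, h2⟩ | ⟨h1, h2⟩)
        exacts [Or.inl hx, Or.inr (Or.inr ⟨h1, h2.symm⟩), Or.inr (Or.inl ⟨h1, h2.symm⟩)]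


theorem pvPass1_fold {maps : List String} :
    ∀ (es : List ((Nat × Nat) × (Nat × Nat))) (d : PySem.Dict (Nat × Nat) (Nat × Nat))
      (E : (Nat × Nat) → (Nat × Nat) → Prop),
      pvUF maps d → (∀ e ∈ es, pvOk maps e.1 ∧ pvOk maps e.2) →
      (∀ p q, pvOk maps p → pvOk maps q →
        (pvF maps d p = pvF maps d q ↔ Relation.EqvGen E p q)) →
      pvUF maps (es.foldl (fun d e =>
        pvUnion d (maps.length * (maps.getD 0 "").length + 1) e.1 e.2) d) ∧
      (∀ p q, pvOk maps p → pvOk maps q →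
        (pvF maps (es.foldl (fun d e =>
            pvUnion d (maps.length * (maps.getD 0 "").length + 1) e.1 e.2) d) p =
          pvF maps (es.foldl (fun d e =>
            pvUnion d (maps.length * (maps.getD 0 "").length + 1) e.1 e.2) d) q ↔
          Relation.EqvGen (fun x y => E x y ∨ (x, y) ∈ es) p q)) := by
  intro es
  induction es with
  | nil =>
    intro d E huf _ hiff
    refine ⟨huf, ?_⟩
    intro p q hp hq
    rw [List.foldl_nil, hiff p q hp hq]
    exact pv_eqvGen_congr (by simp)
  | cons e rest ih =>
    intro d E huf hok hiff
    have he := hok e List.mem_cons_self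
    obtain ⟨huf1, hiff1⟩ := pvUnion_spec huf he.1 he.2
    have hiffE1 : ∀ p q, pvOk maps p → pvOk maps q →
        (pvF maps (pvUnion d (maps.length * (maps.getD 0 "").length + 1) e.1 e.2) p =
          pvF maps (pvUnion d (maps.length * (maps.getD 0 "").length + 1) e.1 e.2) q ↔
          Relation.EqvGen (fun x y => E x y ∨ (x = e.1 ∧ y = e.2)) p q) := by
      intro p q hp hq
      rw [hiff1 p q hp hq, pv_eqvGen_join, hiff p q hp hq, hiff p e.1 hp he.1,
        hiff e.2 q he.2 hq, hiff p e.2 hp he.2, hiff e.1 q he.1 hq]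
    obtain ⟨huf2, hiff2⟩ := ih _ (fun x y => E x y ∨ (x = e.1 ∧ y = e.2)) huf1
      (fun e' he' => hok e' (List.mem_cons_of_mem _ he')) hiffE1
    rw [List.foldl_cons]
    refine ⟨huf2, ?_⟩
    intro p q hp hq
    rw [hiff2 p q hp hq]
    refine pv_eqvGen_congr ?_
    intro x y
    rw [List.mem_cons]
    constructor
    · rintro ((h | ⟨rfl, rfl⟩) | h)
      · exact Or.inl h
      · exact Or.inr (Or.inl rfl)
      · exact Or.inr (Or.inr h)
    · rintro (h | h | h)
      · exact Or.inl (Or.inl h)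
      · exact Or.inl (Or.inr ⟨congrArg Prod.fst h, congrArg Prod.snd h⟩)
      · exact Or.inr h

theorem pvParent0_get? {maps : List String} (x : Nat × Nat) :
    ∀ (l : List (Nat × Nat)) (d : PySem.Dict (Nat × Nat) (Nat × Nat)),
      (l.foldl (fun d p => if pvCell maps p.1 p.2 ≠ 'X' then d.insert p p else d) d).get? x =
        if x ∈ l ∧ pvCell maps x.1 x.2 ≠ 'X' then some x else d.get? x := by
  intro l
  induction l with
  | nil => intro d; simp
  | cons a t ih =>
    intro d
    rw [List.foldl_cons, ih]
    by_cases hxt : x ∈ t ∧ pvCell maps x.1 x.2 ≠ 'X'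
    · rw [if_pos hxt, if_pos ⟨List.mem_cons_of_mem _ hxt.1, hxt.2⟩]
    · rw [if_neg hxt]
      by_cases hxa : x = a
      · subst hxa
        by_cases hcell : pvCell maps x.1 x.2 ≠ 'X'
        · rw [if_pos hcell, if_pos ⟨List.mem_cons_self, hcell⟩, PySem.Dict.get?_insert_self]
        · rw [if_neg hcell, if_neg (fun hc => hcell hc.2)]
      · have : (x ∈ a :: t ∧ pvCell maps x.1 x.2 ≠ 'X') ↔ (x ∈ t ∧ pvCell maps x.1 x.2 ≠ 'X') := by
          rw [List.mem_cons]
          constructor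
          · rintro ⟨h1 | h1, h2⟩
            · exact absurd h1 hxa
            · exact ⟨h1, h2⟩
          · rintro ⟨h1, h2⟩; exact ⟨Or.inr h1, h2⟩
        rw [if_neg (fun hc => hxt (this.1 hc))]
        split
        · rename_i hcell
          rw [PySem.Dict.get?_insert_of_ne _ _ hxa]
        · rfl

theorem pvUF_parent0 {maps : List String} :
    pvUF maps (pvParent0 maps maps.length (maps.getD 0 "").length) ∧
    (∀ p, pvOk maps p →
      pvF maps (pvParent0 maps maps.length (maps.getD 0 "").length) p = p) := by
  have hget : ∀ x : Nat × Nat,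
      (pvParent0 maps maps.length (maps.getD 0 "").length).get? x =
        if pvOk maps x then some x else none := by
    intro x
    unfold pvParent0
    rw [pvParent0_get? x _ PySem.Dict.empty, PySem.Dict.get?_empty]
    by_cases hok : pvOk maps x
    · rw [if_pos ⟨mem_pvCells.2 ⟨hok.1, hok.2.1⟩, hok.2.2⟩, if_pos hok]
    · rw [if_neg (fun hc : x ∈ _ ∧ _ =>
        hok ⟨(mem_pvCells.1 hc.1).1, (mem_pvCells.1 hc.1).2, hc.2⟩), if_neg hok]
  have hpar : ∀ p, pvOk maps p → pvPar (pvParent0 maps maps.length (maps.getD 0 "").length) p = p := by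
    intro p hok
    unfold pvPar
    rw [PySem.Dict.getD_eq_get?_getD, hget p, if_pos hok]
    rfl
  have huf : pvUF maps (pvParent0 maps maps.length (maps.getD 0 "").length) := by
    constructor
    · intro p
      rw [PySem.Dict.contains_eq_isSome_get?, hget p]
      by_cases hok : pvOk maps p
      · simp [hok]
      · simp [hok]
    · intro p hok
      rw [hpar p hok]
      exact ⟨hok, Or.inl rfl⟩
  exact ⟨huf, fun p hok => pvF_root huf hok (hpar p hok)⟩

-- pass 2 bookkeeping
noncomputable def pvPartial (maps : List String) (rep : Nat × Nat) (pfx : List (Nat × Nat)) : Int :=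
  ((pfx.filter (fun p => pvOkb maps p &&
    @decide (pvConn maps rep p) (Classical.propDecidable _))).map (pvValAt maps)).sum


theorem pvPass1_eq (maps : List String) :
    ∀ (l : List (Nat × Nat)) (d : PySem.Dict (Nat × Nat) (Nat × Nat)),
      l.foldl (fun d p =>
        if pvCell maps p.1 p.2 ≠ 'X' then
          let d1 := if p.2 + 1 < (maps.getD 0 "").length ∧ pvCell maps p.1 (p.2 + 1) ≠ 'X' then
            pvUnion d (maps.length * (maps.getD 0 "").length + 1) p (p.1, p.2 + 1) else d
          if p.1 + 1 < maps.length ∧ pvCell maps (p.1 + 1) p.2 ≠ 'X' then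
            pvUnion d1 (maps.length * (maps.getD 0 "").length + 1) p (p.1 + 1, p.2) else d1
        else d) d =
      (l.flatMap (fun p =>
        (if pvCell maps p.1 p.2 ≠ 'X' ∧ p.2 + 1 < (maps.getD 0 "").length ∧
            pvCell maps p.1 (p.2 + 1) ≠ 'X' then [(p, (p.1, p.2 + 1))] else []) ++
        (if pvCell maps p.1 p.2 ≠ 'X' ∧ p.1 + 1 < maps.length ∧
            pvCell maps (p.1 + 1) p.2 ≠ 'X' then [(p, (p.1 + 1, p.2))] else []))).foldl
        (fun d e => pvUnion d (maps.length * (maps.getD 0 "").length + 1) e.1 e.2) d := by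
  intro l
  induction l with
  | nil => intro d; rfl
  | cons p t ih =>
    intro d
    rw [List.foldl_cons, List.flatMap_cons, List.foldl_append, ih]
    congr 1
    dsimp only
    by_cases h1 : pvCell maps p.1 p.2 ≠ 'X'
    · by_cases h2 : p.2 + 1 < (maps.getD 0 "").length ∧ pvCell maps p.1 (p.2 + 1) ≠ 'X'
      · by_cases h3 : p.1 + 1 < maps.length ∧ pvCell maps (p.1 + 1) p.2 ≠ 'X'
        · rw [if_pos h1, if_pos h2, if_pos h3, if_pos (show _ ∧ _ ∧ _ from ⟨h1, h2.1, h2.2⟩),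
            if_pos (show _ ∧ _ ∧ _ from ⟨h1, h3.1, h3.2⟩)]
          rfl
        · rw [if_pos h1, if_pos h2, if_neg h3, if_pos (show _ ∧ _ ∧ _ from ⟨h1, h2.1, h2.2⟩),
            if_neg (fun hc : _ ∧ _ ∧ _ => h3 ⟨hc.2.1, hc.2.2⟩)]
          rfl
      · by_cases h3 : p.1 + 1 < maps.length ∧ pvCell maps (p.1 + 1) p.2 ≠ 'X'
        · rw [if_pos h1, if_neg h2, if_pos h3,
            if_neg (fun hc : _ ∧ _ ∧ _ => h2 ⟨hc.2.1, hc.2.2⟩),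
            if_pos (show _ ∧ _ ∧ _ from ⟨h1, h3.1, h3.2⟩)]
          rfl
        · rw [if_pos h1, if_neg h2, if_neg h3,
            if_neg (fun hc : _ ∧ _ ∧ _ => h2 ⟨hc.2.1, hc.2.2⟩),
            if_neg (fun hc : _ ∧ _ ∧ _ => h3 ⟨hc.2.1, hc.2.2⟩)]
          rfl
    · rw [if_neg h1, if_neg (fun hc : _ ∧ _ ∧ _ => h1 hc.1),
        if_neg (fun hc : _ ∧ _ ∧ _ => h1 hc.1)]
      rfl

theorem pvPartial_ext {maps : List String} {rep p : Nat × Nat} {pfx : List (Nat × Nat)}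
    (h : (pvOkb maps p && @decide (pvConn maps rep p) (Classical.propDecidable _)) = false) :
    pvPartial maps rep (pfx ++ [p]) = pvPartial maps rep pfx := by
  unfold pvPartial
  rw [List.filter_append, List.filter_singleton, h]
  simp

theorem pvPartial_add {maps : List String} {rep p : Nat × Nat} {pfx : List (Nat × Nat)}
    (h : (pvOkb maps p && @decide (pvConn maps rep p) (Classical.propDecidable _)) = true) :
    pvPartial maps rep (pfx ++ [p]) = pvPartial maps rep pfx + pvValAt maps p := by
  unfold pvPartial
  rw [List.filter_append, List.filter_singleton, h]
  simp

theorem pvP2_keys_nodup {maps : List String} {dF : PySem.Dict (Nat × Nat) (Nat × Nat)}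
    (hRoot : ∀ p q, pvOk maps p → pvOk maps q →
      (pvF maps dF p = pvF maps dF q ↔ pvConn maps p q))
    {pfx : List (Nat × Nat)} (hpfxnd : pfx.Nodup) :
    ((pfx.filter (pvIsRepB maps)).map (pvF maps dF)).Nodup := by
  refine List.Nodup.map_on ?_ (hpfxnd.filter _)
  intro r1 h1 r2 h2 hF
  have hr1 := pvIsRepB_eq.1 (List.of_mem_filter h1)
  have hr2 := pvIsRepB_eq.1 (List.of_mem_filter h2)
  exact pv_rep_unique hr1 hr2 ((hRoot r1 r2 hr1.1 hr2.1).1 hF)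

theorem pvP2_step {maps : List String} {dF : PySem.Dict (Nat × Nat) (Nat × Nat)}
    (hRoot : ∀ p q, pvOk maps p → pvOk maps q →
      (pvF maps dF p = pvF maps dF q ↔ pvConn maps p q))
    {pfx : List (Nat × Nat)} {sums : PySem.Dict (Nat × Nat) Int} {p : Nat × Nat}
    (hmem : p ∈ pvCells maps.length (maps.getD 0 "").length)
    (hpfxnd : pfx.Nodup)
    (hlt : ∀ q ∈ pfx, pvLexLt q p = true)
    (hcompl : ∀ q, pvOk maps q → pvLexLt q p = true → q ∈ pfx)
    (hinv : sums.items = (pfx.filter (pvIsRepB maps)).map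
      (fun rep => (pvF maps dF rep, pvPartial maps rep pfx))) :
    (if pvCell maps p.1 p.2 ≠ 'X' then
        sums.insert (pvFind dF (maps.length * (maps.getD 0 "").length + 1) p)
          (sums.getD (pvFind dF (maps.length * (maps.getD 0 "").length + 1) p) 0 +
            pvVal (pvCell maps p.1 p.2))
      else sums).items =
    ((pfx ++ [p]).filter (pvIsRepB maps)).map
      (fun rep => (pvF maps dF rep, pvPartial maps rep (pfx ++ [p]))) := by
  obtain ⟨hp1, hp2⟩ := mem_pvCells.1 hmem
  have hkeys : sums.keys = (pfx.filter (pvIsRepB maps)).map (pvF maps dF) := by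
    show sums.items.map (·.1) = _
    rw [hinv, List.map_map]
    rfl
  have hnd : sums.keys.Nodup := by
    rw [hkeys]
    exact pvP2_keys_nodup hRoot hpfxnd
  by_cases hcell : pvCell maps p.1 p.2 ≠ 'X'
  · rw [if_pos hcell]
    have hok : pvOk maps p := ⟨hp1, hp2, hcell⟩
    rw [show pvFind dF (maps.length * (maps.getD 0 "").length + 1) p = pvF maps dF p from rfl,
      show pvVal (pvCell maps p.1 p.2) = pvValAt maps p from rfl]
    by_cases hrep : pvIsRep maps p
    · -- p opens a new class
      have hnoconn : ∀ rep' ∈ pfx.filter (pvIsRepB maps), ¬ pvConn maps rep' p := by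
        intro rep' hrep' hc
        have hr' := pvIsRepB_eq.1 (List.of_mem_filter hrep')
        exact hrep.2 rep' (hlt rep' (List.mem_of_mem_filter hrep')) ⟨hr'.1, hc⟩
      have hcont : sums.contains (pvF maps dF p) = false := by
        refine Bool.eq_false_iff.2 (fun hc => ?_)
        rw [PySem.Dict.contains_iff_mem_keys, hkeys, List.mem_map] at hc
        obtain ⟨rep', hrep', hF⟩ := hc
        have hr' := pvIsRepB_eq.1 (List.of_mem_filter hrep')
        exact hnoconn rep' hrep' ((hRoot rep' p hr'.1 hok).1 hF)
      rw [PySem.Dict.items_insert_of_not_contains _ _ hcont,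
        PySem.Dict.getD_of_not_contains _ _ hcont, hinv]
      rw [List.filter_append, List.filter_singleton, pvIsRepB_eq.2 hrep, cond_true,
        List.map_append, List.map_singleton]
      congr 1
      · apply List.map_congr_left
        intro rep' hrep'
        rw [pvPartial_ext]
        rcases Bool.eq_false_or_eq_true (pvOkb maps p &&
          @decide (pvConn maps rep' p) (Classical.propDecidable _)) with h0 | h0
        · rw [Bool.and_eq_true] at h0
          exact absurd (@of_decide_eq_true _ (Classical.propDecidable _) h0.2)
            (hnoconn rep' hrep')
        · exact h0
      · have hzero : pvPartial maps p pfx = 0 := by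
          unfold pvPartial
          rw [List.filter_congr (q := fun _ => false) ?_, List.filter_false]
          · rfl
          · intro q hq
            rcases Bool.eq_false_or_eq_true (pvOkb maps q &&
              @decide (pvConn maps p q) (Classical.propDecidable _)) with h0 | h0
            · rw [Bool.and_eq_true] at h0
              obtain ⟨hq1, hq2⟩ := h0
              have hqok : pvOk maps q := of_decide_eq_true hq1
              have hqc : pvConn maps p q := @of_decide_eq_true _ (Classical.propDecidable _) hq2
              exact absurd ⟨hqok, hqc.symm _ _⟩ (hrep.2 q (hlt q hq))
            · exact h0
        have hone : pvPartial maps p (pfx ++ [p]) = 0 + pvValAt maps p := by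
          rw [pvPartial_add, hzero]
          rw [Bool.and_eq_true]
          exact ⟨decide_eq_true hok,
            @decide_eq_true _ (Classical.propDecidable _) (Relation.EqvGen.refl p)⟩
        rw [hone]
    · -- p joins the class of an earlier representative
      obtain ⟨rep, hrepr, hconn⟩ := pv_rep_exists (pvRank (maps.getD 0 "").length p) p le_rfl hok
      have hrne : rep ≠ p := fun hc => hrep (hc ▸ hrepr)
      have hltrp : pvLexLt rep p = true := by
        rcases pvLexLt_trichotomy rep p with h0 | h0 | h0
        · exact h0
        · exact absurd h0 hrne
        · exact absurd ⟨hok, hconn.symm _ _⟩ (hrepr.2 p h0)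
      have hrmem : rep ∈ pfx := hcompl rep hrepr.1 hltrp
      have hrmemf : rep ∈ pfx.filter (pvIsRepB maps) :=
        List.mem_filter.2 ⟨hrmem, pvIsRepB_eq.2 hrepr⟩
      have hFeq : pvF maps dF rep = pvF maps dF p := (hRoot rep p hrepr.1 hok).2 hconn
      have hcont : sums.contains (pvF maps dF p) = true := by
        rw [PySem.Dict.contains_iff_mem_keys, hkeys, List.mem_map]
        exact ⟨rep, hrmemf, hFeq⟩
      have hitem : (pvF maps dF p, pvPartial maps rep pfx) ∈ sums.items := by
        rw [hinv, List.mem_map]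
        exact ⟨rep, hrmemf, by rw [hFeq]⟩
      have hgetD : sums.getD (pvF maps dF p) 0 = pvPartial maps rep pfx :=
        PySem.Dict.getD_of_mem_items _ hitem hnd 0
      rw [PySem.Dict.items_insert_of_contains _ _ hcont, hgetD, hinv, List.map_map]
      have hfiltp : (pfx ++ [p]).filter (pvIsRepB maps) = pfx.filter (pvIsRepB maps) := by
        rw [List.filter_append, List.filter_singleton,
          Bool.eq_false_iff.2 (fun hh => hrep (pvIsRepB_eq.1 hh)), cond_false, List.append_nil]
      rw [hfiltp]
      apply List.map_congr_left
      intro rep' hrep'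
      have hr' := pvIsRepB_eq.1 (List.of_mem_filter hrep')
      simp only [Function.comp_apply]
      by_cases hce : rep' = rep
      · subst hce
        rw [if_pos (by rw [beq_iff_eq]; exact hFeq)]
        have : pvPartial maps rep' (pfx ++ [p]) = pvPartial maps rep' pfx + pvValAt maps p := by
          rw [pvPartial_add]
          rw [Bool.and_eq_true]
          exact ⟨decide_eq_true hok, @decide_eq_true _ (Classical.propDecidable _) hconn⟩
        rw [this, hFeq]
      · have hnc : ¬ pvConn maps rep' p := by
          intro hc
          exact hce (pv_rep_unique hr' hrepr (hc.trans _ _ _ (hconn.symm _ _)))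
        rw [if_neg (by
          rw [beq_iff_eq]
          intro hc
          exact hnc ((hRoot rep' p hr'.1 hok).1 hc))]
        rw [pvPartial_ext]
        rcases Bool.eq_false_or_eq_true (pvOkb maps p &&
          @decide (pvConn maps rep' p) (Classical.propDecidable _)) with h0 | h0
        · rw [Bool.and_eq_true] at h0
          exact absurd (@of_decide_eq_true _ (Classical.propDecidable _) h0.2) hnc
        · exact h0
  · rw [if_neg hcell]
    have hnok : ¬ pvOk maps p := fun hc => hcell hc.2.2
    rw [hinv, List.filter_append, List.filter_singleton,
      Bool.eq_false_iff.2 (fun hh : pvIsRepB maps p = true => hnok (pvIsRepB_eq.1 hh).1),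
      cond_false, List.append_nil]
    apply List.map_congr_left
    intro rep' hrep'
    rw [pvPartial_ext (by
      have : pvOkb maps p = false := by simp [pvOkb, hnok]
      rw [this, Bool.false_and])]

theorem pvP2_run {maps : List String} {dF : PySem.Dict (Nat × Nat) (Nat × Nat)}
    (hRoot : ∀ p q, pvOk maps p → pvOk maps q →
      (pvF maps dF p = pvF maps dF q ↔ pvConn maps p q)) :
    ∀ (suffix pfx : List (Nat × Nat)) (sums : PySem.Dict (Nat × Nat) Int),
      pvCells maps.length (maps.getD 0 "").length = pfx ++ suffix →
      sums.items = (pfx.filter (pvIsRepB maps)).map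
        (fun rep => (pvF maps dF rep, pvPartial maps rep pfx)) →
      (suffix.foldl (fun d p =>
        if pvCell maps p.1 p.2 ≠ 'X' then
          d.insert (pvFind dF (maps.length * (maps.getD 0 "").length + 1) p)
            ((d.getD (pvFind dF (maps.length * (maps.getD 0 "").length + 1) p) 0) +
              pvVal (pvCell maps p.1 p.2))
        else d) sums).items =
      ((pfx ++ suffix).filter (pvIsRepB maps)).map
        (fun rep => (pvF maps dF rep, pvPartial maps rep (pfx ++ suffix))) := by
  intro suffix
  induction suffix with
  | nil =>
    intro pfx sums _ hinv
    simpa using hinv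
  | cons p rest ih =>
    intro pfx sums hsplit hinv
    have hpair := pairwise_pvCells (R := maps.length) (C := (maps.getD 0 "").length)
    rw [hsplit, List.pairwise_append] at hpair
    have hnd := nodup_pvCells (R := maps.length) (C := (maps.getD 0 "").length)
    rw [hsplit] at hnd
    have hpfxnd : pfx.Nodup := hnd.of_append_left
    have hmem : p ∈ pvCells maps.length (maps.getD 0 "").length := by
      rw [hsplit]; exact List.mem_append.2 (Or.inr List.mem_cons_self)
    have hlt : ∀ q ∈ pfx, pvLexLt q p = true :=
      fun q hq => hpair.2.2 q hq p List.mem_cons_self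
    have hcompl : ∀ q, pvOk maps q → pvLexLt q p = true → q ∈ pfx := by
      intro q hqok hqlt
      have hqc : q ∈ pvCells maps.length (maps.getD 0 "").length :=
        mem_pvCells.2 ⟨hqok.1, hqok.2.1⟩
      rw [hsplit] at hqc
      rcases List.mem_append.1 hqc with hq | hq
      · exact hq
      · rcases List.mem_cons.1 hq with rfl | hq
        · rw [pvLexLt_irrefl] at hqlt; exact absurd hqlt (by simp)
        · have := List.pairwise_cons.1 hpair.2.1 |>.1 q hq
          rw [pvLexLt_asymm this] at hqlt
          exact absurd hqlt (by simp)
    have hstep := pvP2_step hRoot hmem hpfxnd hlt hcompl hinv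
    rw [List.foldl_cons]
    have hres := ih (pfx ++ [p]) _ (by rw [hsplit]; simp) hstep
    rw [List.append_assoc] at hres
    simpa using hres

theorem pvB_eq (maps : List String) : solution_alt maps = pvSpec maps := by
  obtain ⟨huf0, hF0⟩ := pvUF_parent0 (maps := maps)
  have hiff0 : ∀ p q, pvOk maps p → pvOk maps q →
      (pvF maps (pvParent0 maps maps.length (maps.getD 0 "").length) p =
        pvF maps (pvParent0 maps maps.length (maps.getD 0 "").length) q ↔
        Relation.EqvGen (fun _ _ : Nat × Nat => False) p q) := by
    intro p q hp hq
    rw [hF0 p hp, hF0 q hq, pv_eqvGen_false]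
  have hedges : ∀ e ∈ pvEdgeList maps, pvOk maps e.1 ∧ pvOk maps e.2 := by
    intro e he
    have : pvE maps e.1 e.2 := he
    rw [pvE_iff] at this
    exact ⟨this.1, this.2.1⟩
  obtain ⟨hufF, hiffF⟩ := pvPass1_fold (pvEdgeList maps) _ _ huf0 hedges hiff0
  have hRoot : ∀ p q, pvOk maps p → pvOk maps q →
      (pvF maps ((pvEdgeList maps).foldl (fun d e =>
          pvUnion d (maps.length * (maps.getD 0 "").length + 1) e.1 e.2)
          (pvParent0 maps maps.length (maps.getD 0 "").length)) p =
        pvF maps ((pvEdgeList maps).foldl (fun d e =>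
          pvUnion d (maps.length * (maps.getD 0 "").length + 1) e.1 e.2)
          (pvParent0 maps maps.length (maps.getD 0 "").length)) q ↔
        pvConn maps p q) := by
    intro p q hp hq
    rw [hiffF p q hp hq]
    exact pv_eqvGen_congr (by
      intro x y
      simp only [false_or]
      rfl)
  have hpass1 : pvPass1 maps maps.length (maps.getD 0 "").length
      (pvParent0 maps maps.length (maps.getD 0 "").length) =
      (pvEdgeList maps).foldl (fun d e =>
        pvUnion d (maps.length * (maps.getD 0 "").length + 1) e.1 e.2)
        (pvParent0 maps maps.length (maps.getD 0 "").length) := by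
    unfold pvPass1 pvEdgeList
    exact pvPass1_eq maps _ _
  have hrun := pvP2_run hRoot (pvCells maps.length (maps.getD 0 "").length) []
    PySem.Dict.empty (by simp) (by rfl)
  rw [List.nil_append] at hrun
  have hp2eq : pvPass2 maps maps.length (maps.getD 0 "").length
      ((pvEdgeList maps).foldl (fun d e =>
        pvUnion d (maps.length * (maps.getD 0 "").length + 1) e.1 e.2)
        (pvParent0 maps maps.length (maps.getD 0 "").length)) =
      PySem.Dict.mk (((pvCells maps.length (maps.getD 0 "").length).filter (pvIsRepB maps)).map
        (fun rep => (pvF maps ((pvEdgeList maps).foldl (fun d e =>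
          pvUnion d (maps.length * (maps.getD 0 "").length + 1) e.1 e.2)
          (pvParent0 maps maps.length (maps.getD 0 "").length)) rep,
          pvPartial maps rep (pvCells maps.length (maps.getD 0 "").length)))) := by
    apply PySem.Dict.ext
    rw [← hrun]
    rfl
  unfold solution_alt pvSpec pvSums pvRepList
  dsimp only
  rw [hpass1, hp2eq]
  have hvals : (PySem.Dict.mk (((pvCells maps.length (maps.getD 0 "").length).filter
      (pvIsRepB maps)).map (fun rep => (pvF maps ((pvEdgeList maps).foldl (fun d e =>
        pvUnion d (maps.length * (maps.getD 0 "").length + 1) e.1 e.2)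
        (pvParent0 maps maps.length (maps.getD 0 "").length)) rep,
        pvPartial maps rep (pvCells maps.length (maps.getD 0 "").length))))).values =
      ((pvCells maps.length (maps.getD 0 "").length).filter (pvIsRepB maps)).map
        (fun rep => pvClassSum maps rep) := by
    simp only [PySem.Dict.values, List.map_map]
    exact List.map_congr_left (fun rep _ => rfl)
  rw [hvals]

-- ===== VERDICT (by name: the statement is the Claim_ definition above) =====
theorem solution_spec : Claim_equal_solution := by
  intro maps _ _
  unfold Spec_solution
  rw [pvA_eq, pvB_eq]
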